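-- pv_equiv track=rewrite | github.com/Daraan/ray_utilities | ray_utilities/config/parser/default_argument_parser.py | organize_subtags
-- ===== SOURCE A (Python) =====
-- from typing import Iterable
--
-- from typing import TYPE_CHECKING, Any, Collection, Generic, Optional, Sequence, cast
--
-- def organize_subtags(tags: Iterable[str], allow_multiple: Collection[str] = ()) -> list[str]:
--     """Ensure that for tag:value or tag=val, only the last occurrence per key is kept.
--     'key' and 'key:' are allowed both to be present; but 'key:' and 'key=' are considered duplicates.
--     """
--     tag_map: dict[str, str] = {}
--     tags = list(tags)
--     for tag in tags:
--         if ":" in tag: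
--             key = tag.split(":", 1)[0] + ":"
--             normalized_key = key[:-1]
--         elif "=" in tag:
--             key = tag.split("=", 1)[0] + "="
--             normalized_key = key[:-1]
--         else:
--             key = tag
--             normalized_key = None  # plain key, not normalized
--
--         if normalized_key is not None and normalized_key not in allow_multiple:
--             tag_map.pop(f"{normalized_key}:", None)  # remove 'key:' if exists
--             tag_map.pop(f"{normalized_key}=", None)  # remove 'key=' if exists
--             tag_map[key] = tag  # set new with : or =
--         else:
--             # allow both 'key' and 'key:' to be present
--             tag_map[tag] = tag
--     if tag_map:
--         tags = list(tag_map.values())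
--     return tags
-- ===== SOURCE B (Python) =====
-- from typing import Collection, Iterable
--
--
-- def organize_subtags(tags: Iterable[str], allow_multiple: Collection[str] = ()) -> list[str]:
--     """Two staged passes and a linear merge: a forward pass keeps the first
--     occurrence of every tag that has no dedup key, a backward pass keeps the
--     last occurrence per dedup key, and the two position-ordered streams are
--     merged into one list."""
--     tags = list(tags)
--
--     def tag_key(tag):
--         """The dedup key of a keyed tag, or None if every occurrence is kept."""
--         if ":" in tag:
--             key = tag.split(":", 1)[0]
--         elif "=" in tag:
--             key = tag.split("=", 1)[0]
--         else:
--             return None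
--         return None if key in allow_multiple else key
--
--     kept = []  # (position, tag): first occurrence of each keyless tag, ascending
--     seen_tags = set()
--     for pos, tag in enumerate(tags):
--         if tag_key(tag) is None and tag not in seen_tags:
--             seen_tags.add(tag)
--             kept.append((pos, tag))
--
--     keyed = []  # (position, tag): last occurrence per dedup key, collected backwards
--     seen_keys = set()
--     for pos, tag in reversed(list(enumerate(tags))):
--         key = tag_key(tag)
--         if key is not None and key not in seen_keys:
--             seen_keys.add(key)
--             keyed.append((pos, tag))
--     keyed.reverse()
--
--     out = []
--     i = j = 0
--     while i < len(kept) and j < len(keyed):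
--         if kept[i][0] < keyed[j][0]:
--             out.append(kept[i][1])
--             i += 1
--         else:
--             out.append(keyed[j][1])
--             j += 1
--     out.extend(tag for _, tag in kept[i:])
--     out.extend(tag for _, tag in keyed[j:])
--     return out
-- ===== Notes on version B (the rewrite author's own statement) =====
-- stated objective: alternative
-- what changed: B replaces A's single-pass dict with pop-and-reinsert move-to-end ordering by two staged set-based passes -- a forward pass collecting the first occurrence of every tag without a dedup key and a backward pass collecting the last occurrence per dedup key -- whose two position-ordered streams are combined by a linear two-pointer merge, with no dict at all.
-- intended difference: When a kept tag (one whose own key is in allow_multiple) is literally equal to a later keyed tag's key followed by '=', e.g. tags=['a=b=','a=b:c'] with allow_multiple=['a'], A's textual tag_map.pop(key+'=') silently deletes that unrelated kept tag (A returns ['a=b:c']); B keeps it (['a=b=','a=b:c']), which is what the docstring's 'only the last occurrence per key' intends. — e.g. on organize_subtags(["a=b=", "a=b:c"], ["a"]): A returns ["a=b:c"], B returns ["a=b=", "a=b:c"]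
import Mathlib
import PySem

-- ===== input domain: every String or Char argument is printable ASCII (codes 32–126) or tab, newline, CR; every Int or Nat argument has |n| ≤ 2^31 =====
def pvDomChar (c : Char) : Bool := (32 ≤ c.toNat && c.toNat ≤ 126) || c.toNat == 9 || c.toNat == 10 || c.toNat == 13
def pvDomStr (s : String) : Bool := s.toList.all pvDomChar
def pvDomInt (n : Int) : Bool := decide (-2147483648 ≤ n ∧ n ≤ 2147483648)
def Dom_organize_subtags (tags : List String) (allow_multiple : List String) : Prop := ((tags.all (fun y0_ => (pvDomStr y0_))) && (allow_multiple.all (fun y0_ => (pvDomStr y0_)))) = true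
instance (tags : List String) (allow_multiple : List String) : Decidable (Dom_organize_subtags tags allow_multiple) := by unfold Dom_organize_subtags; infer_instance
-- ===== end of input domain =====

-- B replaces A's dict with pop-and-reinsert ordering by two staged set-based passes (forward
-- for keyless tags, backward for keyed ones) merged by position (objective: alternative); on
-- D_ inputs, where A's textual pop(key+'=') deletes an unrelated kept tag, B keeps it.

-- tag.split(sep, 1)[0] — exact whenever sep occurs in tag (the only situation both ports use it in)
def pySplitHead (t : String) (sep : Char) : String :=
  String.ofList (t.toList.takeWhile (fun c => c ≠ sep))

-- ===== PORT A =====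
def aStep (allow_multiple : List String) (d : PySem.Dict String String) (tag : String) :
    PySem.Dict String String :=
  let kn : String × Option String :=
    if PySem.Str.isIn ":" tag then
      let key := pySplitHead tag ':' ++ ":"
      (key, some (PySem.Str.slice key none (some (-1))))      -- normalized_key = key[:-1]
    else if PySem.Str.isIn "=" tag then
      let key := pySplitHead tag '=' ++ "="
      (key, some (PySem.Str.slice key none (some (-1))))
    else (tag, none)                                          -- plain key, not normalized
  match kn with
  | (key, some nk) =>
    if !(allow_multiple.contains nk) then
      PySem.Dict.insert
        (PySem.Dict.erase (PySem.Dict.erase d (nk ++ ":")) (nk ++ "=")) key tag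
    else PySem.Dict.insert d tag tag
  | (_, none) => PySem.Dict.insert d tag tag

def organize_subtags (tags : List String) (allow_multiple : List String) : List String :=
  let tag_map := tags.foldl (aStep allow_multiple) PySem.Dict.empty
  if tag_map.items = [] then tags else PySem.Dict.values tag_map

-- ===== PORT B =====
def tagKey (allow_multiple : List String) (tag : String) : Option String :=
  if PySem.Str.isIn ":" tag then
    let key := pySplitHead tag ':'
    if allow_multiple.contains key then none else some key
  else if PySem.Str.isIn "=" tag then
    let key := pySplitHead tag '='
    if allow_multiple.contains key then none else some key
  else none

def keepStep (allow_multiple : List String)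
    (st : PySem.Set String × List (Int × String)) (pt : Int × String) :
    PySem.Set String × List (Int × String) :=
  if (tagKey allow_multiple pt.2).isNone && !(PySem.Set.contains st.1 pt.2) then
    (PySem.Set.add st.1 pt.2, st.2 ++ [pt])
  else st

def keyedStep (allow_multiple : List String)
    (st : PySem.Set String × List (Int × String)) (pt : Int × String) :
    PySem.Set String × List (Int × String) :=
  match tagKey allow_multiple pt.2 with
  | some k => if !(PySem.Set.contains st.1 k) then (PySem.Set.add st.1 k, st.2 ++ [pt]) else st
  | none => st

def mergeTags : List (Int × String) → List (Int × String) → List String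
  | [], ys => ys.map Prod.snd
  | x :: xs, [] => (x :: xs).map Prod.snd
  | x :: xs, y :: ys =>
      if x.1 < y.1 then x.2 :: mergeTags xs (y :: ys) else y.2 :: mergeTags (x :: xs) ys
termination_by xs ys => xs.length + ys.length

def organize_subtags_alt (tags : List String) (allow_multiple : List String) : List String :=
  let kept := ((PySem.List.enumerate tags 0).foldl (keepStep allow_multiple)
    (PySem.Set.empty, [])).2
  let keyed := (((PySem.List.enumerate tags 0).reverse).foldl (keyedStep allow_multiple)
    (PySem.Set.empty, [])).2.reverse
  mergeTags kept keyed

-- ===== PRECONDITION & SPEC =====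
-- Inputs where a kept tag is literally the dedup key of a LATER keyed tag followed by '=':
-- there A's textual pop(key+'=') deletes that unrelated kept tag; B keeps it, as the
-- docstring ("only the last occurrence per key") intends.
-- dKey t: the characters of t's dedup key (before the first ':' if any, else the first '=')
def dKey (t : String) : List Char :=
  t.toList.take (t.toList.idxOf (if ':' ∈ t.toList then ':' else '='))

def D_organize_subtags (tags : List String) (allow_multiple : List String) : Prop :=
  ∃ j, j < tags.length ∧ ∃ i, i < j ∧
    (':' ∈ tags[j]!.toList ∨ '=' ∈ tags[j]!.toList) ∧
    (∀ a ∈ allow_multiple, a.toList ≠ dKey tags[j]!) ∧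
    tags[i]!.toList = dKey tags[j]! ++ ['='] ∧
    ∃ a ∈ allow_multiple, a.toList = dKey tags[i]!

instance (tags : List String) (allow_multiple : List String) :
    Decidable (D_organize_subtags tags allow_multiple) := by
  unfold D_organize_subtags; infer_instance

def Spec_organize_subtags (tags : List String) (allow_multiple : List String)
    (out : List String) : Prop :=
  ¬ D_organize_subtags tags allow_multiple → out = organize_subtags_alt tags allow_multiple

instance (tags : List String) (allow_multiple : List String) (out : List String) :
    Decidable (Spec_organize_subtags tags allow_multiple out) := by
  unfold Spec_organize_subtags; infer_instance

def pvDiffWitness_organize_subtags : List String × List String := (["a=b=", "a=b:c"], ["a"])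

def pvDiffWitnessOut_organize_subtags : (List String) × (List String) :=
  (["a=b:c"], ["a=b=", "a=b:c"])

-- ===== CLAIM (what is proved, stated in full; the proofs are below) =====
def Claim_unchanged_organize_subtags : Prop := ∀ (tags : List String) (allow_multiple : List String), Dom_organize_subtags tags allow_multiple → Spec_organize_subtags tags allow_multiple (organize_subtags tags allow_multiple)
def Claim_changed_organize_subtags : Prop := Dom_organize_subtags (pvDiffWitness_organize_subtags.1) (pvDiffWitness_organize_subtags.2) ∧ D_organize_subtags (pvDiffWitness_organize_subtags.1) (pvDiffWitness_organize_subtags.2) ∧ organize_subtags (pvDiffWitness_organize_subtags.1) (pvDiffWitness_organize_subtags.2) = pvDiffWitnessOut_organize_subtags.1 ∧ organize_subtags_alt (pvDiffWitness_organize_subtags.1) (pvDiffWitness_organize_subtags.2) = pvDiffWitnessOut_organize_subtags.2 ∧ pvDiffWitnessOut_organize_subtags.1 ≠ pvDiffWitnessOut_organize_subtags.2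

def Claim_exact_organize_subtags : Prop := ∀ (tags : List String) (allow_multiple : List String), Dom_organize_subtags tags allow_multiple → D_organize_subtags tags allow_multiple → organize_subtags tags allow_multiple ≠ organize_subtags_alt tags allow_multiple

-- ===== LEMMAS AND PROOFS =====

-- classification of a tag, as A computes it (proof-side helpers, not part of the ports)
def hasColon (t : String) : Bool := PySem.Str.isIn ":" t
def hasEq (t : String) : Bool := PySem.Str.isIn "=" t
def normKey (t : String) : String := if hasColon t then pySplitHead t ':' else pySplitHead t '='
def keepCls (am : List String) (t : String) : Bool :=
  (!hasColon t && !hasEq t) || am.contains (normKey t)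

-- the separator and A's dict key of a replace-class tag
def sepStr (t : String) : String := if hasColon t then ":" else "="
def aKey (t : String) : String := normKey t ++ sepStr t
-- the (A-dict-key, value) pair a model entry denotes
def toPairE (p : (Int × String) × (Int × String)) : String × String :=
  (if p.1.1 = 0 then aKey p.2.2 else p.2.2, p.2.2)
-- A's dict as a function of the model dict: sort the entries by position, map to A's pairs
def render (e : PySem.Dict (Int × String) (Int × String)) : List (String × String) :=
  (PySem.List.sorted e.items (fun p => p.2.1) false).map toPairE

-- proof-side MODEL: A's dict instrumented with explicit positions under keys
-- (0, key) for replace-keys and (1, full tag) for keep-keys (used only in proofs)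
def mStep (am : List String) (e : PySem.Dict (Int × String) (Int × String))
    (pt : Int × String) : PySem.Dict (Int × String) (Int × String) :=
  let k : Option String :=
    if PySem.Str.isIn ":" pt.2 then some (pySplitHead pt.2 ':')
    else if PySem.Str.isIn "=" pt.2 then some (pySplitHead pt.2 '=')
    else none
  match k with
  | some k =>
    if !(am.contains k) then
      PySem.Dict.insert (PySem.Dict.erase e (1, k ++ "=")) (0, k) pt
    else PySem.Dict.setdefault e (1, pt.2) pt
  | none => PySem.Dict.setdefault e (1, pt.2) pt

def WfE (am : List String) (i : Int) (p : (Int × String) × (Int × String)) : Prop :=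
  p.2.1 < i ∧
  ((p.1.1 = 0 ∧ p.1.2 = normKey p.2.2 ∧ (hasColon p.2.2 || hasEq p.2.2) = true ∧
      normKey p.2.2 ∉ am)
   ∨ (p.1.1 = 1 ∧ p.1.2 = p.2.2 ∧ keepCls am p.2.2 = true))

def Wf (am : List String) (e : PySem.Dict (Int × String) (Int × String)) (i : Int) : Prop :=
  e.keys.Nodup ∧ (e.items.map (fun p => p.2.1)).Nodup ∧ ∀ p ∈ e.items, WfE am i p

-- ---------- string-level facts ----------
theorem splitHead_toList (t : String) (sep : Char) :
    (pySplitHead t sep).toList = t.toList.takeWhile (fun c => c ≠ sep) := by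
  simp [pySplitHead]

theorem sep_not_mem_splitHead (t : String) (sep : Char) : sep ∉ (pySplitHead t sep).toList := by
  rw [splitHead_toList]
  intro h
  have := List.mem_takeWhile_imp h
  simp at this

theorem mem_splitHead (t : String) (sep : Char) :
    ∀ c ∈ (pySplitHead t sep).toList, c ∈ t.toList := by
  rw [splitHead_toList]
  intro c hc
  exact (List.takeWhile_sublist _).mem hc

theorem hasColon_iff (t : String) : hasColon t = true ↔ ':' ∈ t.toList := by
  rw [hasColon, PySem.Str.isIn_iff_infix]
  show [':'] <:+: t.toList ↔ _
  exact List.singleton_infix_iff ':' t.toList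

theorem hasEq_iff (t : String) : hasEq t = true ↔ '=' ∈ t.toList := by
  rw [hasEq, PySem.Str.isIn_iff_infix]
  show ['='] <:+: t.toList ↔ _
  exact List.singleton_infix_iff '=' t.toList

theorem takeWhile_append_last {p : Char → Bool} {k : List Char} {c : Char}
    (h : ∀ x ∈ k, p x = true) (hc : p c = false) : (k ++ [c]).takeWhile p = k := by
  induction k with
  | nil => simp [List.takeWhile, hc]
  | cons x xs ih =>
    have hx := h x (by simp)
    simp only [List.cons_append, List.takeWhile_cons, hx, if_true]
    rw [ih (fun y hy => h y (by simp [hy]))]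

theorem normKey_colon_free (t : String) : ':' ∉ (normKey t).toList := by
  rw [normKey]
  by_cases h : hasColon t = true
  · simp only [h, if_true]; exact sep_not_mem_splitHead t ':'
  · simp only [h, if_false]
    intro hmem
    exact h ((hasColon_iff t).mpr (mem_splitHead t '=' ':' hmem))

theorem normKey_eq_free (t : String) (h : hasColon t = false) : '=' ∉ (normKey t).toList := by
  rw [normKey, h]
  simp only [Bool.false_eq_true, if_false]
  exact sep_not_mem_splitHead t '='

theorem toList_concat_colon (k : String) : (k ++ ":").toList = k.toList ++ [':'] := by
  rw [String.toList_append]; rfl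

theorem toList_concat_eq (k : String) : (k ++ "=").toList = k.toList ++ ['='] := by
  rw [String.toList_append]; rfl

theorem normKey_concat_colon (k : String) (hk : ':' ∉ k.toList) :
    hasColon (k ++ ":") = true ∧ normKey (k ++ ":") = k := by
  have hcol : hasColon (k ++ ":") = true := by
    rw [hasColon_iff, toList_concat_colon]; simp
  refine ⟨hcol, ?_⟩
  rw [normKey, hcol]
  simp only [if_true]
  apply String.toList_inj.mp
  rw [splitHead_toList, toList_concat_colon]
  exact takeWhile_append_last (p := fun c => c ≠ ':')
    (fun x hx => by
      simp only [decide_eq_true_eq, ne_eq]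
      intro h; subst h; exact hk hx) (by simp)

theorem normKey_concat_eq (k : String) (hc : ':' ∉ k.toList) (he : '=' ∉ k.toList) :
    hasColon (k ++ "=") = false ∧ hasEq (k ++ "=") = true ∧ normKey (k ++ "=") = k := by
  have hncol : hasColon (k ++ "=") = false := by
    rw [Bool.eq_false_iff]
    intro h
    rw [hasColon_iff, toList_concat_eq] at h
    rcases List.mem_append.mp h with h | h
    · exact hc h
    · simp at h
  have heq : hasEq (k ++ "=") = true := by
    rw [hasEq_iff, toList_concat_eq]; simp
  refine ⟨hncol, heq, ?_⟩
  rw [normKey, hncol]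
  simp only [Bool.false_eq_true, if_false]
  apply String.toList_inj.mp
  rw [splitHead_toList, toList_concat_eq]
  exact takeWhile_append_last (p := fun c => c ≠ '=')
    (fun x hx => by
      simp only [decide_eq_true_eq, ne_eq]
      intro h; subst h; exact he hx) (by simp)

theorem concat_str_inj {k₁ k₂ : String} {c₁ c₂ : Char}
    (h : (k₁.toList ++ [c₁]) = (k₂.toList ++ [c₂])) : k₁ = k₂ ∧ c₁ = c₂ := by
  have h1 : k₁.toList = k₂.toList := by
    have := congrArg List.dropLast h
    simpa using this
  have h2 : c₁ = c₂ := by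
    have := congrArg List.getLast? h
    simpa using this
  exact ⟨String.toList_inj.mp h1, h2⟩

theorem aKey_toList (t : String) :
    (aKey t).toList = (normKey t).toList ++ [if hasColon t then ':' else '='] := by
  rw [aKey, sepStr]
  by_cases h : hasColon t = true
  · simp only [h, if_true]; exact toList_concat_colon _
  · rw [Bool.not_eq_true] at h
    simp only [h, Bool.false_eq_true, if_false]; exact toList_concat_eq _

-- ---------- sorting facts ----------
theorem sorted_strict {α : Type} (l : List α) (key : α → Int)
    (h : (l.map key).Nodup) :
    (PySem.List.sorted l key false).Pairwise (fun a b => key a < key b) := by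
  have hle := PySem.List.sorted_pairwise l key
  have hperm := PySem.List.sorted_perm l key false
  have hnd : ((PySem.List.sorted l key false).map key).Nodup :=
    ((hperm.map key).nodup_iff).mpr h
  have hne : (PySem.List.sorted l key false).Pairwise (fun a b => key a ≠ key b) :=
    List.pairwise_map.mp hnd
  exact (hle.and hne).imp (fun hab => lt_of_le_of_ne hab.1 hab.2)

theorem sorted_append_max {α : Type} (l : List α) (x : α) (key : α → Int)
    (h : ∀ p ∈ l, key p < key x) (hn : (l.map key).Nodup) :
    PySem.List.sorted (l ++ [x]) key false = PySem.List.sorted l key false ++ [x] := by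
  apply PySem.List.sorted_eq_of_perm_of_pairwise_lt
  · exact (PySem.List.sorted_perm l key false).append (List.Perm.refl [x])
  · rw [List.pairwise_append]
    refine ⟨sorted_strict l key hn, List.pairwise_singleton _ _, ?_⟩
    intro a ha b hb
    rw [List.mem_singleton] at hb
    subst hb
    exact h a ((PySem.List.mem_sorted l key false a).mp ha)

theorem sorted_filter {α : Type} (l : List α) (key : α → Int) (p : α → Bool)
    (hn : (l.map key).Nodup) :
    PySem.List.sorted (l.filter p) key false = (PySem.List.sorted l key false).filter p := by
  apply PySem.List.sorted_eq_of_perm_of_pairwise_lt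
  · exact (PySem.List.sorted_perm l key false).filter p
  · exact (sorted_strict l key hn).filter p

theorem filter_map_swap {α β : Type} (l : List α) (f : α → β) (p : β → Bool) :
    (l.map f).filter p = (l.filter (fun a => p (f a))).map f := by
  induction l with
  | nil => rfl
  | cons x t ih => simp only [List.map_cons, List.filter_cons]; split <;> simp_all

theorem nodup_key_unique {κ ν : Type} (l : List (κ × ν)) (h : (l.map Prod.fst).Nodup)
    {p q : κ × ν} (hp : p ∈ l) (hq : q ∈ l) (hk : p.1 = q.1) : p = q := by
  have hln : l.Nodup := h.of_map
  exact (List.nodup_map_iff_inj_on hln).mp h p hp q hq hk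

-- ---------- classification facts ----------
theorem aKey_colon {t : String} (h : hasColon t = true) : aKey t = normKey t ++ ":" := by
  rw [aKey, sepStr, if_pos h]

theorem aKey_eqv {t : String} (h : hasColon t = false) : aKey t = normKey t ++ "=" := by
  rw [aKey, sepStr, if_neg (by simp [h])]

theorem keep_ne_concat_colon (am : List String) (t' k : String) (hk' : keepCls am t' = true)
    (hfree : ':' ∉ k.toList) (hnam : k ∉ am) : t' ≠ k ++ ":" := by
  rintro rfl
  obtain ⟨hcol, hnorm⟩ := normKey_concat_colon k hfree
  rw [keepCls, hcol, hnorm] at hk'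
  simp only [Bool.not_true, Bool.false_and, Bool.false_or] at hk'
  exact hnam (List.contains_iff_mem.mp hk')

theorem keep_ne_concat_eq (am : List String) (t' k : String) (hk' : keepCls am t' = true)
    (hc : ':' ∉ k.toList) (he : '=' ∉ k.toList) (hnam : k ∉ am) : t' ≠ k ++ "=" := by
  rintro rfl
  obtain ⟨hncol, heq, hnorm⟩ := normKey_concat_eq k hc he
  rw [keepCls, hncol, heq, hnorm] at hk'
  simp only [Bool.not_true, Bool.not_false, Bool.true_and, Bool.false_or] at hk'
  exact hnam (List.contains_iff_mem.mp hk')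

theorem repl_facts (am : List String) (t : String) (hrep : keepCls am t = false) :
    (hasColon t || hasEq t) = true ∧ normKey t ∉ am := by
  rw [keepCls, Bool.or_eq_false_iff] at hrep
  obtain ⟨h1, h2⟩ := hrep
  constructor
  · rcases Bool.and_eq_false_iff.mp h1 with h | h
    · have : hasColon t = true := by revert h; cases hasColon t <;> simp
      simp [this]
    · have : hasEq t = true := by revert h; cases hasEq t <;> simp
      simp [this]
  · intro hmem
    rw [List.contains_iff_mem.mpr hmem] at h2
    exact absurd h2 (by simp)

theorem keep_ne_aKey (am : List String) {t t' : String} (hrep : keepCls am t = false)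
    (hk' : keepCls am t' = true) : t' ≠ aKey t := by
  obtain ⟨-, hnam⟩ := repl_facts am t hrep
  by_cases hct : hasColon t = true
  · rw [aKey_colon hct]
    exact keep_ne_concat_colon am t' (normKey t) hk' (normKey_colon_free t) hnam
  · rw [Bool.not_eq_true] at hct
    rw [aKey_eqv hct]
    exact keep_ne_concat_eq am t' (normKey t) hk' (normKey_colon_free t)
      (normKey_eq_free t hct) hnam

theorem toPairE_fst_of_zero {p : (Int × String) × (Int × String)} (h : p.1.1 = 0) :
    (toPairE p).1 = aKey p.2.2 := by simp [toPairE, h]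

theorem toPairE_fst_of_one {p : (Int × String) × (Int × String)} (h : p.1.1 = 1) :
    (toPairE p).1 = p.2.2 := by simp [toPairE, h]

theorem WfE_keep (am : List String) (i : Int) {p : (Int × String) × (Int × String)}
    (hp : WfE am i p) (h1 : p.1.1 = 1) : p.1.2 = p.2.2 ∧ keepCls am p.2.2 = true := by
  rcases hp.2 with ⟨h0, -⟩ | ⟨-, hk, hc⟩
  · rw [h1] at h0; exact absurd h0 (by norm_num)
  · exact ⟨hk, hc⟩

theorem WfE_repl (am : List String) (i : Int) {p : (Int × String) × (Int × String)}
    (hp : WfE am i p) (h0 : p.1.1 = 0) :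
    p.1.2 = normKey p.2.2 ∧ keepCls am p.2.2 = false := by
  rcases hp.2 with ⟨-, hk, hs, hnam⟩ | ⟨h1, -⟩
  · refine ⟨hk, ?_⟩
    rw [keepCls, Bool.or_eq_false_iff]
    refine ⟨?_, ?_⟩
    · rcases Bool.or_eq_true_iff.mp hs with h | h <;> simp [h]
    · rw [Bool.eq_false_iff]
      intro hcont
      exact hnam (List.contains_iff_mem.mp hcont)
  · rw [h1] at h0; exact absurd h0 (by norm_num)

theorem key_inj (am : List String) (i : Int) {p q : (Int × String) × (Int × String)}
    (hp : WfE am i p) (hq : WfE am i q) (h : (toPairE p).1 = (toPairE q).1) : p.1 = q.1 := by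
  by_cases hp1 : p.1.1 = 1 <;> by_cases hq1 : q.1.1 = 1
  · obtain ⟨hpk, -⟩ := WfE_keep am i hp hp1
    obtain ⟨hqk, -⟩ := WfE_keep am i hq hq1
    rw [toPairE_fst_of_one hp1, toPairE_fst_of_one hq1] at h
    exact Prod.ext (hp1.trans hq1.symm) (hpk.trans (h.trans hqk.symm))
  · have hq0 : q.1.1 = 0 := by rcases hq.2 with ⟨h0, -⟩ | ⟨h1, -⟩; exact h0; exact absurd h1 hq1
    obtain ⟨-, hpc⟩ := WfE_keep am i hp hp1
    obtain ⟨-, hqrep⟩ := WfE_repl am i hq hq0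
    rw [toPairE_fst_of_one hp1, toPairE_fst_of_zero hq0] at h
    exact absurd h (keep_ne_aKey am hqrep hpc)
  · have hp0 : p.1.1 = 0 := by rcases hp.2 with ⟨h0, -⟩ | ⟨h1, -⟩; exact h0; exact absurd h1 hp1
    obtain ⟨-, hqc⟩ := WfE_keep am i hq hq1
    obtain ⟨-, hprep⟩ := WfE_repl am i hp hp0
    rw [toPairE_fst_of_zero hp0, toPairE_fst_of_one hq1] at h
    exact absurd h.symm (keep_ne_aKey am hprep hqc)
  · have hp0 : p.1.1 = 0 := by rcases hp.2 with ⟨h0, -⟩ | ⟨h1, -⟩; exact h0; exact absurd h1 hp1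
    have hq0 : q.1.1 = 0 := by rcases hq.2 with ⟨h0, -⟩ | ⟨h1, -⟩; exact h0; exact absurd h1 hq1
    obtain ⟨hpk, -⟩ := WfE_repl am i hp hp0
    obtain ⟨hqk, -⟩ := WfE_repl am i hq hq0
    rw [toPairE_fst_of_zero hp0, toPairE_fst_of_zero hq0] at h
    have hl := congrArg String.toList h
    rw [aKey_toList, aKey_toList] at hl
    have := concat_str_inj hl
    exact Prod.ext (hp0.trans hq0.symm) (hpk.trans (this.1.trans hqk.symm))

theorem WfE_mono (am : List String) {i j : Int} (hij : i ≤ j)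
    {p : (Int × String) × (Int × String)} (hp : WfE am i p) : WfE am j p :=
  ⟨lt_of_lt_of_le hp.1 hij, hp.2⟩

theorem items_nodup_of_keys (e : PySem.Dict (Int × String) (Int × String))
    (h : e.keys.Nodup) : e.items.Nodup ∧ (e.items.map Prod.fst).Nodup := by
  have hm : (e.items.map Prod.fst).Nodup := by simpa [PySem.Dict.keys] using h
  exact ⟨hm.of_map, hm⟩

theorem erase_items (e : PySem.Dict (Int × String) (Int × String)) (kk : Int × String) :
    (e.erase kk).items = e.items.filter (fun p => !(p.1 == kk)) := rfl

theorem erase_keys_nodup (e : PySem.Dict (Int × String) (Int × String)) (kk : Int × String)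
    (h : e.keys.Nodup) : (e.erase kk).keys.Nodup := by
  have hm := (items_nodup_of_keys e h).2
  have hsub : ((e.erase kk).items.map Prod.fst).Sublist (e.items.map Prod.fst) := by
    rw [erase_items]
    exact List.Sublist.map _ List.filter_sublist
  have : ((e.erase kk).items.map Prod.fst).Nodup := List.Nodup.sublist hsub hm
  simpa [PySem.Dict.keys] using this

theorem erase_pos_nodup (e : PySem.Dict (Int × String) (Int × String)) (kk : Int × String)
    (h : (e.items.map (fun p => p.2.1)).Nodup) :
    ((e.erase kk).items.map (fun p => p.2.1)).Nodup := by
  apply List.Nodup.sublist ?_ h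
  rw [erase_items]
  exact List.Sublist.map _ List.filter_sublist

theorem mem_erase_items (e : PySem.Dict (Int × String) (Int × String)) (kk : Int × String)
    {p : (Int × String) × (Int × String)} (hp : p ∈ (e.erase kk).items) : p ∈ e.items := by
  rw [erase_items] at hp
  exact List.mem_of_mem_filter hp

theorem render_keys_nodup (am : List String)
    (e : PySem.Dict (Int × String) (Int × String)) (i : Int) (hw : Wf am e i) :
    ((render e).map Prod.fst).Nodup := by
  obtain ⟨hknd, hpos, hwfe⟩ := hw
  obtain ⟨hind, hmnd⟩ := items_nodup_of_keys e hknd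
  have hsnd : (PySem.List.sorted e.items (fun p => p.2.1) false).Nodup :=
    (PySem.List.sorted_perm e.items (fun p => p.2.1) false).nodup_iff.mpr hind
  rw [render, List.map_map]
  apply (List.nodup_map_iff_inj_on hsnd).mpr
  intro x hx y hy hxy
  have hx' := (PySem.List.mem_sorted e.items (fun p => p.2.1) false x).mp hx
  have hy' := (PySem.List.mem_sorted e.items (fun p => p.2.1) false y).mp hy
  have hkeq : x.1 = y.1 := key_inj am i (hwfe x hx') (hwfe y hy') hxy
  exact nodup_key_unique e.items hmnd hx' hy' hkeq

-- ---------- dict insert-overwrite decomposition ----------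
theorem insert_decomp (e : PySem.Dict (Int × String) (Int × String))
    (kk : Int × String) (v : Int × String) (hknd : e.keys.Nodup)
    (hc : e.contains kk = true) :
    ∃ l₁ old l₂, e.items = l₁ ++ (kk, old) :: l₂ ∧
      (e.insert kk v).items = l₁ ++ (kk, v) :: l₂ ∧
      (∀ p ∈ l₁, p.1 ≠ kk) ∧ (∀ p ∈ l₂, p.1 ≠ kk) := by
  obtain ⟨hind, hmnd⟩ := items_nodup_of_keys e hknd
  have hkk : kk ∈ e.items.map Prod.fst := by
    have := (PySem.Dict.contains_iff_mem_keys e kk).mp hc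
    simpa [PySem.Dict.keys] using this
  obtain ⟨p₀, hp₀, hfst⟩ := List.mem_map.mp hkk
  obtain ⟨l₁, l₂, hl⟩ := List.mem_iff_append.mp hp₀
  have hp₀eq : p₀ = (kk, p₀.2) := by rw [← hfst]
  have hmnd' : (l₁.map Prod.fst ++ kk :: l₂.map Prod.fst).Nodup := by
    have := hmnd
    rw [hl] at this
    simpa [hfst] using this
  have hnotin : kk ∉ l₁.map Prod.fst ++ l₂.map Prod.fst := by
    have := List.nodup_middle.mp (by simpa using hmnd')
    exact (List.nodup_cons.mp this).1
  have h₁ : ∀ p ∈ l₁, p.1 ≠ kk := by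
    intro p hp hpe
    exact hnotin (List.mem_append.mpr (Or.inl (hpe ▸ List.mem_map_of_mem hp)))
  have h₂ : ∀ p ∈ l₂, p.1 ≠ kk := by
    intro p hp hpe
    exact hnotin (List.mem_append.mpr (Or.inr (hpe ▸ List.mem_map_of_mem hp)))
  refine ⟨l₁, p₀.2, l₂, by rw [hl, ← hp₀eq], ?_, h₁, h₂⟩
  rw [PySem.Dict.items_insert_of_contains e v hc, hl]
  rw [List.map_append, List.map_cons]
  congr 1
  · apply (List.map_congr_left ?_).trans (List.map_id _)
    intro p hp
    simp only [id_eq]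
    rw [if_neg]
    simp [h₁ p hp]
  · congr 1
    · rw [if_pos (by simp [hfst])]
    · apply (List.map_congr_left ?_).trans (List.map_id _)
      intro p hp
      simp only [id_eq]
      rw [if_neg]
      simp [h₂ p hp]

theorem sorted_insert_overwrite (e : PySem.Dict (Int × String) (Int × String))
    (kk : Int × String) (v : Int × String) (hknd : e.keys.Nodup)
    (hpos : (e.items.map (fun p => p.2.1)).Nodup)
    (hc : e.contains kk = true) (hmax : ∀ p ∈ e.items, p.2.1 < v.1) :
    PySem.List.sorted (e.insert kk v).items (fun p => p.2.1) false
      = (PySem.List.sorted e.items (fun p => p.2.1) false).filter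
          (fun p => !(p.1 == kk)) ++ [(kk, v)] := by
  obtain ⟨l₁, old, l₂, hl, hl', h₁, h₂⟩ := insert_decomp e kk v hknd hc
  have hfil : e.items.filter (fun p => !(p.1 == kk)) = l₁ ++ l₂ := by
    rw [hl, List.filter_append, List.filter_cons]
    rw [if_neg (by simp)]
    congr 1
    · apply List.filter_eq_self.mpr; intro a ha; simp [h₁ a ha]
    · apply List.filter_eq_self.mpr; intro a ha; simp [h₂ a ha]
  apply PySem.List.sorted_eq_of_perm_of_pairwise_lt
  · rw [hl']
    have s1 : ((PySem.List.sorted e.items (fun p => p.2.1) false).filter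
        (fun p => !(p.1 == kk))).Perm (e.items.filter (fun p => !(p.1 == kk))) :=
      (PySem.List.sorted_perm e.items (fun p => p.2.1) false).filter _
    refine (s1.append (List.Perm.refl [(kk, v)])).trans ?_
    rw [hfil]
    exact (List.perm_append_singleton _ _).trans List.perm_middle.symm
  · rw [List.pairwise_append]
    refine ⟨(sorted_strict e.items (fun p => p.2.1) hpos).filter _,
      List.pairwise_singleton _ _, ?_⟩
    intro a ha b hb
    rw [List.mem_singleton] at hb
    subst hb
    have ha' : a ∈ e.items :=
      (PySem.List.mem_sorted e.items (fun p => p.2.1) false a).mp (List.mem_of_mem_filter ha)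
    exact hmax a ha'

-- ---------- step normalization ----------
theorem slice_head_colon (t : String) :
    PySem.Str.slice (pySplitHead t ':' ++ ":") none (some (-1)) = pySplitHead t ':' := by
  apply String.toList_inj.mp
  rw [PySem.Str.slice_to_neg_one, toList_concat_colon, List.dropLast_concat]

theorem slice_head_eqv (t : String) :
    PySem.Str.slice (pySplitHead t '=' ++ "=") none (some (-1)) = pySplitHead t '=' := by
  apply String.toList_inj.mp
  rw [PySem.Str.slice_to_neg_one, toList_concat_eq, List.dropLast_concat]

theorem aStep_eq (am : List String) (d : PySem.Dict String String) (t : String) :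
    aStep am d t = if keepCls am t = true then d.insert t t
      else ((d.erase (normKey t ++ ":")).erase (normKey t ++ "=")).insert (aKey t) t := by
  by_cases hc : PySem.Str.isIn ":" t = true
  · have hcol : hasColon t = true := hc
    have hc' : PySem.Chars.isIn [':'] t.toList = true := by simpa using hc
    by_cases hm : pySplitHead t ':' ∈ am
    · simp [aStep, hc', slice_head_colon, hm, keepCls, hcol, normKey]
    · simp [aStep, hc', slice_head_colon, hm, keepCls, hcol, normKey, aKey, sepStr]
  · simp only [Bool.not_eq_true] at hc
    have hcol : hasColon t = false := hc
    have hc' : PySem.Chars.isIn [':'] t.toList = false := by simpa using hc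
    by_cases he : PySem.Str.isIn "=" t = true
    · have heqv : hasEq t = true := he
      have he' : PySem.Chars.isIn ['='] t.toList = true := by simpa using he
      by_cases hm : pySplitHead t '=' ∈ am
      · simp [aStep, hc', he', slice_head_eqv, hm, keepCls, hcol, heqv, normKey]
      · simp [aStep, hc', he', slice_head_eqv, hm, keepCls, hcol, heqv, normKey, aKey, sepStr]
    · simp only [Bool.not_eq_true] at he
      have heqv : hasEq t = false := he
      have he' : PySem.Chars.isIn ['='] t.toList = false := by simpa using he
      simp [aStep, hc', he', keepCls, hcol, heqv]

theorem mStep_eq (am : List String) (e : PySem.Dict (Int × String) (Int × String))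
    (pt : Int × String) :
    mStep am e pt = if keepCls am pt.2 = true then e.setdefault (1, pt.2) pt
      else (e.erase (1, normKey pt.2 ++ "=")).insert (0, normKey pt.2) pt := by
  by_cases hc : PySem.Str.isIn ":" pt.2 = true
  · have hcol : hasColon pt.2 = true := hc
    have hc' : PySem.Chars.isIn [':'] pt.2.toList = true := by simpa using hc
    by_cases hm : pySplitHead pt.2 ':' ∈ am
    · simp [mStep, hc', hm, keepCls, hcol, normKey]
    · simp [mStep, hc', hm, keepCls, hcol, normKey]
  · simp only [Bool.not_eq_true] at hc
    have hcol : hasColon pt.2 = false := hc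
    have hc' : PySem.Chars.isIn [':'] pt.2.toList = false := by simpa using hc
    by_cases he : PySem.Str.isIn "=" pt.2 = true
    · have heqv : hasEq pt.2 = true := he
      have he' : PySem.Chars.isIn ['='] pt.2.toList = true := by simpa using he
      by_cases hm : pySplitHead pt.2 '=' ∈ am
      · simp [mStep, hc', he', hm, keepCls, hcol, heqv, normKey]
      · simp [mStep, hc', he', hm, keepCls, hcol, heqv, normKey]
    · simp only [Bool.not_eq_true] at he
      have heqv : hasEq pt.2 = false := he
      have he' : PySem.Chars.isIn ['='] pt.2.toList = false := by simpa using he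
      simp [mStep, hc', he', keepCls, hcol, heqv]

-- ---------- the synchronised step (A against the model) ----------
theorem colon_ne_eqv (k : String) : (k ++ ":") ≠ (k ++ "=") := by
  intro h
  have := congrArg String.toList h
  rw [toList_concat_colon, toList_concat_eq] at this
  have := (concat_str_inj (k₁ := k) (k₂ := k) this).2
  simp at this

theorem step_main (am : List String) (d : PySem.Dict String String)
    (e : PySem.Dict (Int × String) (Int × String)) (i : Int) (t : String)
    (hrender : d.items = render e) (hwf : Wf am e i) :
    (aStep am d t).items = render (mStep am e (i, t)) ∧
    Wf am (mStep am e (i, t)) (i + 1) := by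
  obtain ⟨hknd, hpos, hwfe⟩ := hwf
  have hdknd : (d.items.map Prod.fst).Nodup := by
    rw [hrender]; exact render_keys_nodup am e i ⟨hknd, hpos, hwfe⟩
  rw [aStep_eq, mStep_eq]
  by_cases hk : keepCls am t = true
  · rw [if_pos hk, if_pos hk]
    by_cases hcont : e.contains ((1 : Int), t) = true
    · rw [PySem.Dict.setdefault_of_contains e _ hcont]
      have h1t : ((1 : Int), t) ∈ e.items.map Prod.fst := by
        simpa [PySem.Dict.keys] using (PySem.Dict.contains_iff_mem_keys e (1, t)).mp hcont
      obtain ⟨p₀, hp₀, hf⟩ := List.mem_map.mp h1t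
      have hp01 : p₀.1.1 = 1 := by rw [hf]
      have hp0t : p₀.1.2 = t := by rw [hf]
      have hval : p₀.2.2 = t := ((WfE_keep am i (hwfe p₀ hp₀) hp01).1).symm.trans hp0t
      have hmemd : (t, t) ∈ d.items := by
        rw [hrender, render]
        refine List.mem_map.mpr ⟨p₀, (PySem.List.mem_sorted _ _ _ _).mpr hp₀, ?_⟩
        rw [toPairE]
        rw [if_neg (by rw [hp01]; norm_num)]
        rw [hval]
      have hcd : d.contains t = true := by
        apply (PySem.Dict.contains_iff_mem_keys d t).mpr
        have : t ∈ d.items.map Prod.fst := List.mem_map.mpr ⟨(t, t), hmemd, rfl⟩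
        simpa [PySem.Dict.keys] using this
      have hid : (d.insert t t).items = d.items := by
        rw [PySem.Dict.items_insert_of_contains d t hcd]
        apply (List.map_congr_left ?_).trans (List.map_id _)
        intro q hq
        simp only [id_eq]
        by_cases hqt : q.1 = t
        · rw [if_pos (by simp [hqt])]
          exact (nodup_key_unique d.items hdknd hq hmemd (by simp [hqt])).symm
        · rw [if_neg (by simp [hqt])]
      exact ⟨by rw [hid, hrender],
        ⟨hknd, hpos, fun p hp => WfE_mono am (by omega) (hwfe p hp)⟩⟩
    · have hcontf : e.contains ((1 : Int), t) = false := by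
        revert hcont; cases e.contains ((1 : Int), t) <;> simp
      rw [PySem.Dict.setdefault_of_not_contains e _ hcontf]
      have hitems' : (e.insert ((1 : Int), t) (i, t)).items = e.items ++ [(((1 : Int), t), (i, t))] :=
        PySem.Dict.items_insert_of_not_contains e _ hcontf
      have hdnf : d.contains t = false := by
        rw [Bool.eq_false_iff]
        intro hc
        have : t ∈ d.items.map Prod.fst := by
          simpa [PySem.Dict.keys] using (PySem.Dict.contains_iff_mem_keys d t).mp hc
        obtain ⟨q, hq, hqf⟩ := List.mem_map.mp this
        rw [hrender, render] at hq
        obtain ⟨p, hp, hpq⟩ := List.mem_map.mp hq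
        have hpmem : p ∈ e.items := (PySem.List.mem_sorted _ _ _ _).mp hp
        have hw := hwfe p hpmem
        have hfst : (toPairE p).1 = t := by rw [hpq]; exact hqf
        by_cases hp1 : p.1.1 = 1
        · obtain ⟨hpk, -⟩ := WfE_keep am i hw hp1
          have : p.1 = ((1 : Int), t) := by
            rw [toPairE_fst_of_one hp1] at hfst
            exact Prod.ext hp1 (hpk.trans hfst)
          have : ((1 : Int), t) ∈ e.keys := by
            rw [← this]
            have : p.1 ∈ e.items.map Prod.fst := List.mem_map.mpr ⟨p, hpmem, rfl⟩
            simpa [PySem.Dict.keys] using this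
          rw [(PySem.Dict.contains_iff_mem_keys e _).mpr this] at hcontf
          exact absurd hcontf (by simp)
        · have hp0 : p.1.1 = 0 := by
            rcases hw.2 with ⟨h0, -⟩ | ⟨h1, -⟩; exact h0; exact absurd h1 hp1
          obtain ⟨-, hprep⟩ := WfE_repl am i hw hp0
          rw [toPairE_fst_of_zero hp0] at hfst
          exact keep_ne_aKey am hprep hk hfst.symm
      constructor
      · rw [PySem.Dict.items_insert_of_not_contains d t hdnf, hrender]
        have hre : render (e.insert ((1 : Int), t) (i, t)) = render e ++ [(t, t)] := by
          rw [render, hitems',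
            sorted_append_max e.items _ _ (fun p hp => (hwfe p hp).1) hpos, List.map_append,
            List.map_singleton]
          rw [show toPairE ((((1 : Int), t)), ((i : Int), t)) = (t, t) by simp [toPairE]]
          rfl
        rw [hre]
      · refine ⟨PySem.Dict.nodup_keys_insert e _ _ hknd, ?_, ?_⟩
        · rw [hitems', List.map_append]
          have : ((((1 : Int), t), ((i : Int), t)) :: ([] : List ((Int × String) × (Int × String)))).map
              (fun p => p.2.1) = [i] := rfl
          rw [this]
          apply List.Nodup.append hpos (List.nodup_singleton i)
          intro a ha hb
          rw [List.mem_singleton] at hb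
          subst hb
          obtain ⟨p, hp, hpe⟩ := List.mem_map.mp ha
          have := (hwfe p hp).1
          omega
        · intro p hp
          rw [hitems'] at hp
          rcases List.mem_append.mp hp with hp | hp
          · exact WfE_mono am (by omega) (hwfe p hp)
          · rw [List.mem_singleton] at hp
            subst hp
            exact ⟨by simp, Or.inr ⟨rfl, rfl, hk⟩⟩
  · rw [if_neg hk, if_neg hk]
    have hkf : keepCls am t = false := by revert hk; cases keepCls am t <;> simp
    obtain ⟨hsep, hnam⟩ := repl_facts am t hkf
    have herase2 : ((d.erase (normKey t ++ ":")).erase (normKey t ++ "=")).items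
        = d.items.filter (fun q => !(q.1 == (normKey t ++ "=")) && !(q.1 == (normKey t ++ ":"))) := by
      show (d.items.filter _).filter _ = _
      rw [List.filter_filter]
    have haKey : aKey t = normKey t ++ ":" ∨ aKey t = normKey t ++ "=" := by
      by_cases h : hasColon t = true
      · exact Or.inl (aKey_colon h)
      · exact Or.inr (aKey_eqv (by revert h; cases hasColon t <;> simp))
    have hcon : ((d.erase (normKey t ++ ":")).erase (normKey t ++ "=")).contains (aKey t) = false := by
      rw [Bool.eq_false_iff]
      intro hc
      have : aKey t ∈ (((d.erase (normKey t ++ ":")).erase (normKey t ++ "=")).items).map Prod.fst := by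
        simpa [PySem.Dict.keys] using (PySem.Dict.contains_iff_mem_keys _ _).mp hc
      obtain ⟨q, hq, hqf⟩ := List.mem_map.mp this
      rw [herase2] at hq
      have hcond := (List.mem_filter.mp hq).2
      rw [Bool.and_eq_true] at hcond
      rcases haKey with h | h
      · rw [hqf, h] at hcond
        simp at hcond
      · rw [hqf, h] at hcond
        simp at hcond
    have hAitems : (((d.erase (normKey t ++ ":")).erase (normKey t ++ "=")).insert (aKey t) t).items
        = d.items.filter (fun q => !(q.1 == (normKey t ++ "=")) && !(q.1 == (normKey t ++ ":")))
          ++ [(aKey t, t)] := by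
      rw [PySem.Dict.items_insert_of_not_contains _ _ hcon, herase2]
    have h1knd := erase_keys_nodup e (((1 : Int), normKey t ++ "=")) hknd
    have h1pos := erase_pos_nodup e (((1 : Int), normKey t ++ "=")) hpos
    have h1wfe : ∀ p ∈ (e.erase (((1 : Int), normKey t ++ "="))).items, WfE am i p :=
      fun p hp => hwfe p (mem_erase_items e _ hp)
    have h1sorted : PySem.List.sorted (e.erase (((1 : Int), normKey t ++ "="))).items
          (fun p => p.2.1) false
        = (PySem.List.sorted e.items (fun p => p.2.1) false).filter
            (fun p => !(p.1 == (((1 : Int), normKey t ++ "=") : Int × String))) := by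
      rw [erase_items]
      exact sorted_filter e.items _ _ hpos
    have hfiltereq : d.items.filter
          (fun q => !(q.1 == (normKey t ++ "=")) && !(q.1 == (normKey t ++ ":")))
        = (((PySem.List.sorted e.items (fun p => p.2.1) false).filter
              (fun p => !(p.1 == (((1 : Int), normKey t ++ "=") : Int × String)))).filter
            (fun p => !(p.1 == (((0 : Int), normKey t) : Int × String)))).map toPairE := by
      rw [hrender, render, filter_map_swap, List.filter_filter]
      congr 1
      apply List.filter_congr
      intro p hp
      have hpmem : p ∈ e.items := (PySem.List.mem_sorted _ _ _ _).mp hp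
      have hw := hwfe p hpmem
      by_cases hp1 : p.1.1 = 1
      · obtain ⟨hpk, hpc⟩ := WfE_keep am i hw hp1
        have hp1e : p.1 = ((1 : Int), p.2.2) := Prod.ext hp1 hpk
        have hne1 : p.2.2 ≠ normKey t ++ ":" :=
          keep_ne_concat_colon am _ _ hpc (normKey_colon_free t) hnam
        have e2 : (p.2.2 == normKey t ++ ":") = false := beq_eq_false_iff_ne.mpr hne1
        have e3 : (p.1 == (((0 : Int), normKey t) : Int × String)) = false := by
          apply beq_eq_false_iff_ne.mpr
          intro h
          rw [h] at hp1
          norm_num at hp1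
        by_cases hx : p.2.2 = normKey t ++ "="
        · have e5 : (p.2.2 == normKey t ++ "=") = true := beq_iff_eq.mpr hx
          have e6 : (p.1 == (((1 : Int), normKey t ++ "=") : Int × String)) = true :=
            beq_iff_eq.mpr (by rw [hp1e, hx])
          simp [toPairE_fst_of_one hp1, e5, e2, e3, e6]
        · have e5 : (p.2.2 == normKey t ++ "=") = false := beq_eq_false_iff_ne.mpr hx
          have e6 : (p.1 == (((1 : Int), normKey t ++ "=") : Int × String)) = false := by
            apply beq_eq_false_iff_ne.mpr
            rw [hp1e]
            intro hcon'
            exact hx (by injection hcon')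
          simp [toPairE_fst_of_one hp1, e5, e2, e3, e6]
      · have hp0 : p.1.1 = 0 := by
          rcases hw.2 with ⟨h0, -⟩ | ⟨h1, -⟩; exact h0; exact absurd h1 hp1
        obtain ⟨hpk, hprep⟩ := WfE_repl am i hw hp0
        have e4 : (p.1 == (((1 : Int), normKey t ++ "=") : Int × String)) = false := by
          apply beq_eq_false_iff_ne.mpr
          intro h
          rw [h] at hp0
          norm_num at hp0
        by_cases hkk : normKey p.2.2 = normKey t
        · have hR : p.1 = (((0 : Int), normKey t) : Int × String) :=
            Prod.ext hp0 (hpk.trans hkk)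
          have : aKey p.2.2 = normKey t ++ ":" ∨ aKey p.2.2 = normKey t ++ "=" := by
            by_cases h : hasColon p.2.2 = true
            · exact Or.inl (by rw [aKey_colon h, hkk])
            · exact Or.inr (by
                rw [aKey_eqv (by revert h; cases hasColon p.2.2 <;> simp), hkk])
          have e3 : (p.1 == (((0 : Int), normKey t) : Int × String)) = true := beq_iff_eq.mpr hR
          rcases this with h | h
          · have e2 : (aKey p.2.2 == normKey t ++ "=") = false :=
              beq_eq_false_iff_ne.mpr (by rw [h]; exact colon_ne_eqv _)
            simp [toPairE_fst_of_zero hp0, h, e2, e3, e4]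
          · have e1 : (aKey p.2.2 == normKey t ++ ":") = false :=
              beq_eq_false_iff_ne.mpr (by rw [h]; exact (colon_ne_eqv _).symm)
            simp [toPairE_fst_of_zero hp0, h, e1, e3, e4]
        · have h1 : aKey p.2.2 ≠ normKey t ++ ":" := by
            intro h
            apply hkk
            have := congrArg String.toList h
            rw [aKey_toList, toList_concat_colon] at this
            exact (concat_str_inj this).1
          have h2 : aKey p.2.2 ≠ normKey t ++ "=" := by
            intro h
            apply hkk
            have := congrArg String.toList h
            rw [aKey_toList, toList_concat_eq] at this
            exact (concat_str_inj this).1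
          have hR : p.1 ≠ (((0 : Int), normKey t) : Int × String) := by
            intro h
            apply hkk
            have h2' := congrArg Prod.snd h
            simp only at h2'
            exact hpk.symm.trans h2'
          have e1 : (aKey p.2.2 == normKey t ++ "=") = false := beq_eq_false_iff_ne.mpr h2
          have e2 : (aKey p.2.2 == normKey t ++ ":") = false := beq_eq_false_iff_ne.mpr h1
          have e3 : (p.1 == (((0 : Int), normKey t) : Int × String)) = false :=
            beq_eq_false_iff_ne.mpr hR
          simp [toPairE_fst_of_zero hp0, e1, e2, e3, e4]
    have hnewpair : toPairE ((((0 : Int), normKey t) : Int × String), ((i : Int), t)) = (aKey t, t) := by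
      simp [toPairE]
    by_cases hcb : (e.erase (((1 : Int), normKey t ++ "="))).contains
        (((0 : Int), normKey t) : Int × String) = true
    · obtain ⟨l₁, old, l₂, hl, hl', h₁, h₂⟩ :=
        insert_decomp (e.erase (((1 : Int), normKey t ++ "="))) _ (i, t) h1knd hcb
      have hov := sorted_insert_overwrite (e.erase (((1 : Int), normKey t ++ "="))) _ (i, t)
        h1knd h1pos hcb (fun p hp => (h1wfe p hp).1)
      have hmemsub : ∀ p ∈ l₁ ++ l₂, p ∈ (e.erase (((1 : Int), normKey t ++ "="))).items := by
        intro p hp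
        rw [hl]
        rcases List.mem_append.mp hp with h | h
        · exact List.mem_append.mpr (Or.inl h)
        · exact List.mem_append.mpr (Or.inr (List.mem_cons_of_mem _ h))
      refine ⟨?_, PySem.Dict.nodup_keys_insert _ _ _ h1knd, ?_, ?_⟩
      · rw [hAitems, render, hov, List.map_append, List.map_singleton, hnewpair, h1sorted,
          hfiltereq]
      · rw [hl']
        have hold : (l₁.map (fun p => p.2.1) ++ old.1 :: l₂.map (fun p => p.2.1)).Nodup := by
          have := h1pos
          rw [hl] at this
          simpa using this
        have hrest := (List.nodup_cons.mp (List.nodup_middle.mp hold)).2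
        have hnoti : (i : Int) ∉ l₁.map (fun p => p.2.1) ++ l₂.map (fun p => p.2.1) := by
          intro hmem
          rw [← List.map_append] at hmem
          obtain ⟨p, hp, hpe⟩ := List.mem_map.mp hmem
          have := (h1wfe p (hmemsub p hp)).1
          omega
        have : (l₁ ++ (((0 : Int), normKey t), ((i : Int), t)) :: l₂).map (fun p => p.2.1)
            = l₁.map (fun p => p.2.1) ++ (i : Int) :: l₂.map (fun p => p.2.1) := by simp
        rw [this]
        exact List.nodup_middle.mpr (List.nodup_cons.mpr ⟨hnoti, hrest⟩)
      · intro p hp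
        rw [hl'] at hp
        rcases List.mem_append.mp hp with hp' | hp'
        · exact WfE_mono am (by omega) (h1wfe p (hmemsub p (List.mem_append.mpr (Or.inl hp'))))
        · rcases List.mem_cons.mp hp' with hp'' | hp''
          · subst hp''
            exact ⟨by simp, Or.inl ⟨rfl, rfl, hsep, hnam⟩⟩
          · exact WfE_mono am (by omega)
              (h1wfe p (hmemsub p (List.mem_append.mpr (Or.inr hp''))))
    · have hcbf : (e.erase (((1 : Int), normKey t ++ "="))).contains
          (((0 : Int), normKey t) : Int × String) = false := by
        revert hcb
        cases (e.erase (((1 : Int), normKey t ++ "="))).contains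
          (((0 : Int), normKey t) : Int × String) <;> simp
      have hitems' : ((e.erase (((1 : Int), normKey t ++ "="))).insert
            (((0 : Int), normKey t) : Int × String) (i, t)).items
          = (e.erase (((1 : Int), normKey t ++ "="))).items
            ++ [((((0 : Int), normKey t) : Int × String), ((i : Int), t))] :=
        PySem.Dict.items_insert_of_not_contains _ _ hcbf
      have hfid : (PySem.List.sorted (e.erase (((1 : Int), normKey t ++ "="))).items
            (fun p => p.2.1) false).filter
            (fun p => !(p.1 == (((0 : Int), normKey t) : Int × String)))
          = PySem.List.sorted (e.erase (((1 : Int), normKey t ++ "="))).items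
              (fun p => p.2.1) false := by
        apply List.filter_eq_self.mpr
        intro p hp
        have hpmem : p ∈ (e.erase (((1 : Int), normKey t ++ "="))).items :=
          (PySem.List.mem_sorted _ _ _ _).mp hp
        have : p.1 ≠ (((0 : Int), normKey t) : Int × String) := by
          intro h
          have : (((0 : Int), normKey t) : Int × String)
              ∈ (e.erase (((1 : Int), normKey t ++ "="))).keys := by
            rw [← h]
            have : p.1 ∈ (e.erase (((1 : Int), normKey t ++ "="))).items.map Prod.fst :=
              List.mem_map.mpr ⟨p, hpmem, rfl⟩
            simpa [PySem.Dict.keys] using this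
          rw [(PySem.Dict.contains_iff_mem_keys _ _).mpr this] at hcbf
          exact absurd hcbf (by simp)
        simp [this]
      refine ⟨?_, PySem.Dict.nodup_keys_insert _ _ _ h1knd, ?_, ?_⟩
      · rw [hAitems, hfiltereq, ← h1sorted, hfid, render, hitems',
          sorted_append_max _ _ _ (fun p hp => (h1wfe p hp).1) h1pos, List.map_append,
          List.map_singleton, hnewpair]
      · rw [hitems', List.map_append]
        have : ([((((0 : Int), normKey t) : Int × String), ((i : Int), t))].map
            (fun p => p.2.1)) = [(i : Int)] := rfl
        rw [this]
        apply List.Nodup.append h1pos (List.nodup_singleton _)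
        intro a ha hb
        rw [List.mem_singleton] at hb
        subst hb
        obtain ⟨p, hp, hpe⟩ := List.mem_map.mp ha
        have := (h1wfe p hp).1
        omega
      · intro p hp
        rw [hitems'] at hp
        rcases List.mem_append.mp hp with hp | hp
        · exact WfE_mono am (by omega) (h1wfe p hp)
        · rw [List.mem_singleton] at hp
          subst hp
          exact ⟨by simp, Or.inl ⟨rfl, rfl, hsep, hnam⟩⟩

-- ---------- the loop (A against the model) ----------
theorem loop_main (am : List String) (rest : List String) :
    ∀ (d : PySem.Dict String String) (e : PySem.Dict (Int × String) (Int × String)) (i : Int),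
      d.items = render e → Wf am e i →
      (rest.foldl (aStep am) d).items
          = render ((PySem.List.enumerate rest i).foldl (mStep am) e) ∧
      Wf am ((PySem.List.enumerate rest i).foldl (mStep am) e) (i + rest.length) := by
  induction rest with
  | nil =>
    intro d e i h hw
    exact ⟨h, by simpa using hw⟩
  | cons t rest ih =>
    intro d e i h hw
    obtain ⟨h1, h2⟩ := step_main am d e i t h hw
    have henum : PySem.List.enumerate (t :: rest) i
        = (i, t) :: PySem.List.enumerate rest (i + 1) := rfl
    rw [henum]
    simp only [List.foldl_cons]
    have hrec := ih (aStep am d t) (mStep am e (i, t)) (i + 1) h1 h2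
    refine ⟨hrec.1, ?_⟩
    have harith : (i + 1) + (rest.length : Int) = i + (((t :: rest).length : Nat) : Int) := by
      simp only [List.length_cons]
      push_cast
      ring
    exact harith ▸ hrec.2

theorem Wf_step (am : List String) (e : PySem.Dict (Int × String) (Int × String))
    (i : Int) (t : String) (hwf : Wf am e i) : Wf am (mStep am e (i, t)) (i + 1) :=
  (step_main am (PySem.Dict.mk (render e)) e i t rfl hwf).2

-- ---------- bridges between the D_ shape condition and the classification ----------
theorem take_idxOf_eq_takeWhile (c : Char) :
    ∀ l : List Char, l.take (l.idxOf c) = l.takeWhile (fun x => x ≠ c) := by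
  intro l
  induction l with
  | nil => rfl
  | cons a l ih =>
    by_cases hac : a = c
    · subst hac
      simp [List.takeWhile_cons]
    · rw [List.takeWhile_cons, if_pos (by simp [hac])]
      rw [List.idxOf_cons]
      simp only [beq_eq_false_iff_ne.mpr hac, cond_false]
      rw [List.take_succ_cons, ih]

theorem dKey_eq (t : String) : dKey t = (normKey t).toList := by
  rw [dKey, normKey]
  by_cases h : ':' ∈ t.toList
  · rw [if_pos h, if_pos ((hasColon_iff t).mpr h), splitHead_toList, take_idxOf_eq_takeWhile]
  · have hc : hasColon t = false := by
      rw [Bool.eq_false_iff]; intro hh; exact h ((hasColon_iff t).mp hh)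
    rw [if_neg h, hc]
    simp only [Bool.false_eq_true, if_false]
    rw [splitHead_toList, take_idxOf_eq_takeWhile]

theorem tagKey_eq (am : List String) (t : String) :
    tagKey am t = if keepCls am t = true then none else some (normKey t) := by
  by_cases hc : PySem.Str.isIn ":" t = true
  · have hcol : hasColon t = true := hc
    have hc' : PySem.Chars.isIn [':'] t.toList = true := by simpa using hc
    by_cases hm : am.contains (pySplitHead t ':') = true
    · simp [tagKey, hc', hm, keepCls, hcol, normKey]
    · simp only [Bool.not_eq_true] at hm
      simp [tagKey, hc', hm, keepCls, hcol, normKey]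
  · simp only [Bool.not_eq_true] at hc
    have hcol : hasColon t = false := hc
    have hc' : PySem.Chars.isIn [':'] t.toList = false := by simpa using hc
    by_cases he : PySem.Str.isIn "=" t = true
    · have heqv : hasEq t = true := he
      have he' : PySem.Chars.isIn ['='] t.toList = true := by simpa using he
      by_cases hm : am.contains (pySplitHead t '=') = true
      · simp [tagKey, hc', he', hm, keepCls, hcol, heqv, normKey]
      · simp only [Bool.not_eq_true] at hm
        simp [tagKey, hc', he', hm, keepCls, hcol, heqv, normKey]
    · simp only [Bool.not_eq_true] at he
      have heqv : hasEq t = false := he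
      have he' : PySem.Chars.isIn ['='] t.toList = false := by simpa using he
      simp [tagKey, hc', he', keepCls, hcol, heqv]

theorem set_contains_add (s : PySem.Set String) (x y : String) :
    PySem.Set.contains (PySem.Set.add s x) y = (PySem.Set.contains s y || y == x) := by
  rw [Bool.eq_iff_iff, Bool.or_eq_true, PySem.Set.contains_iff, PySem.Set.contains_iff,
    PySem.Set.mem_add, beq_iff_eq]

-- the class of a model entry: true for keep-keys (full tags), false for replace-keys
def isK (p : (Int × String) × (Int × String)) : Bool := p.1.1 == 1

theorem not_isK_ne_one {p : (Int × String) × (Int × String)} (h : isK p = false) :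
    ∀ k : String, p.1 ≠ ((1 : Int), k) := by
  intro k hk
  rw [isK, hk] at h
  simp at h

theorem isK_entry_key {am : List String} {i : Int} {p : (Int × String) × (Int × String)}
    (hw : WfE am i p) (h : isK p = true) :
    p.1 = ((1 : Int), p.2.2) ∧ keepCls am p.2.2 = true := by
  have h1 : p.1.1 = 1 := by rwa [isK, beq_iff_eq] at h
  obtain ⟨hk, hc⟩ := WfE_keep am i hw h1
  exact ⟨Prod.ext h1 hk, hc⟩

theorem cls0_entry_key {am : List String} {i : Int} {p : (Int × String) × (Int × String)}
    (hw : WfE am i p) (h : isK p = false) :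
    p.1 = ((0 : Int), normKey p.2.2) ∧ keepCls am p.2.2 = false := by
  have h1 : p.1.1 ≠ 1 := by
    intro hh; rw [isK, beq_iff_eq.mpr hh] at h; simp at h
  have h0 : p.1.1 = 0 := by
    rcases hw.2 with ⟨h0, -⟩ | ⟨hone, -⟩
    · exact h0
    · exact absurd hone h1
  obtain ⟨hk, hc⟩ := WfE_repl am i hw h0
  exact ⟨Prod.ext h0 hk, hc⟩

theorem getElemBang_eq (l : List String) (k : Nat) (hk : k < l.length) : l[k]! = l[k] := by
  rw [List.getElem!_eq_getElem?_getD, List.getElem?_eq_getElem hk]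
  rfl

-- D_ packaged for use inside the induction
theorem D_of_kill (tags am : List String) {i j : Int} {x t : String}
    (hx : (i, x) ∈ PySem.List.enumerate tags 0) (ht : (j, t) ∈ PySem.List.enumerate tags 0)
    (hij : i < j) (hkx : keepCls am x = true) (hkt : keepCls am t = false)
    (hvict : x = normKey t ++ "=") : D_organize_subtags tags am := by
  rw [PySem.List.mem_enumerate_iff] at hx ht
  obtain ⟨ki, hki, hxi⟩ := hx
  obtain ⟨kj, hkj, htj⟩ := ht
  have hxv : x = tags[ki] := by have := congrArg Prod.snd hxi; simpa using this
  have htv : t = tags[kj] := by have := congrArg Prod.snd htj; simpa using this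
  have hiv : i = (ki : Int) := by have := congrArg Prod.fst hxi; simpa using this
  have hjv : j = (kj : Int) := by have := congrArg Prod.fst htj; simpa using this
  obtain ⟨hsep, hnam⟩ := repl_facts am t hkt
  have hxeq : hasEq x = true := by
    rw [hasEq_iff, hvict, toList_concat_eq]
    simp
  have hxam : normKey x ∈ am := by
    rw [keepCls] at hkx
    rcases Bool.or_eq_true_iff.mp hkx with h | h
    · rw [Bool.and_eq_true] at h
      rw [hxeq] at h
      exact absurd h.2 (by simp)
    · exact List.contains_iff_mem.mp h
  have hkij : ki < kj := by
    have : (ki : Int) < (kj : Int) := by rw [← hiv, ← hjv]; exact hij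
    exact_mod_cast this
  have hgj : tags[kj]! = t := by rw [getElemBang_eq tags kj hkj, htv]
  have hgi : tags[ki]! = x := by rw [getElemBang_eq tags ki hki, hxv]
  refine ⟨kj, hkj, ki, hkij, ?_, ?_, ?_, ?_⟩
  · rw [hgj]
    rcases Bool.or_eq_true_iff.mp hsep with h | h
    · exact Or.inl ((hasColon_iff t).mp h)
    · exact Or.inr ((hasEq_iff t).mp h)
  · rw [hgj, dKey_eq]
    intro a ha hcontra
    exact hnam (String.toList_inj.mp hcontra ▸ ha)
  · rw [hgj, hgi, dKey_eq, hvict, toList_concat_eq]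
  · rw [hgi, dKey_eq]
    exact ⟨normKey x, hxam, rfl⟩

-- ---------- the keep-pass bisimulation (B's forward pass against the model) ----------
def KInv (am tags : List String) (e : PySem.Dict (Int × String) (Int × String))
    (st : PySem.Set String × List (Int × String)) : Prop :=
  st.2 = (e.items.filter isK).map Prod.snd ∧
  (∀ t : String, PySem.Set.contains st.1 t = e.contains ((1 : Int), t)) ∧
  (∀ p ∈ e.items, isK p = true → p.2 ∈ PySem.List.enumerate tags 0)

theorem keep_sync_step (am tags : List String) (hND : ¬ D_organize_subtags tags am)
    (e : PySem.Dict (Int × String) (Int × String)) (st : PySem.Set String × List (Int × String))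
    (j : Int) (t : String) (hwf : Wf am e j) (hinv : KInv am tags e st)
    (hmem : (j, t) ∈ PySem.List.enumerate tags 0) :
    KInv am tags (mStep am e (j, t)) (keepStep am st (j, t)) := by
  obtain ⟨hacc, hseen, hval⟩ := hinv
  obtain ⟨hknd, hpos, hwfe⟩ := hwf
  rw [mStep_eq]
  rw [keepStep]
  simp only [tagKey_eq]
  by_cases hk : keepCls am t = true
  · rw [if_pos hk]
    simp only [hk, if_true, Option.isNone_none, Bool.true_and]
    by_cases hc : PySem.Set.contains st.1 t = true
    · have hce : e.contains ((1 : Int), t) = true := by rw [← hseen]; exact hc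
      rw [PySem.Dict.setdefault_of_contains e _ hce]
      rw [hc]
      simp only [Bool.not_true, Bool.false_eq_true, if_false]
      exact ⟨hacc, hseen, hval⟩
    · have hcf : PySem.Set.contains st.1 t = false := by
        revert hc; cases PySem.Set.contains st.1 t <;> simp
      have hce : e.contains ((1 : Int), t) = false := by rw [← hseen]; exact hcf
      rw [PySem.Dict.setdefault_of_not_contains e _ hce, hcf]
      simp only [Bool.not_false, if_true]
      have hitems : (e.insert ((1 : Int), t) (j, t)).items
          = e.items ++ [(((1 : Int), t), (j, t))] :=
        PySem.Dict.items_insert_of_not_contains e _ hce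
      refine ⟨?_, ?_, ?_⟩
      · rw [hitems, List.filter_append, List.map_append, ← hacc]
        simp [isK]
      · intro t'
        rw [set_contains_add, hseen, PySem.Dict.contains_insert]
        have : ((((1 : Int), t') : Int × String) == ((1 : Int), t)) = (t' == t) := by
          by_cases h : t' = t
          · subst h; simp
          · have h1 : (t' == t) = false := beq_eq_false_iff_ne.mpr h
            have h2 : ((((1 : Int), t') : Int × String) == ((1 : Int), t)) = false := by
              apply beq_eq_false_iff_ne.mpr
              intro hh; exact h (by injection hh)
            rw [h1, h2]
        rw [this, Bool.or_comm]
      · intro p hp hpk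
        rw [hitems] at hp
        rcases List.mem_append.mp hp with h | h
        · exact hval p h hpk
        · rw [List.mem_singleton] at h
          subst h
          exact hmem
  · have hkf : keepCls am t = false := by revert hk; cases keepCls am t <;> simp
    rw [if_neg hk]
    simp only [hkf, Bool.false_eq_true, if_false, Option.isNone_some, Bool.false_and,
      if_false]
    -- A's textual pop of (1, normKey t ++ "=") is dead here: a victim would witness D_
    have herased : (e.erase ((1 : Int), normKey t ++ "=")).items = e.items := by
      rw [erase_items]
      apply List.filter_eq_self.mpr
      intro p hp
      have hw := hwfe p hp
      by_cases hpk : isK p = true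
      · obtain ⟨hkey, hkc⟩ := isK_entry_key hw hpk
        have hne : p.2.2 ≠ normKey t ++ "=" := by
          intro hvict
          have hpv := hval p hp hpk
          have hp2 : p.2 = (p.2.1, p.2.2) := rfl
          exact hND (D_of_kill tags am (by rw [← hp2]; exact hpv) hmem hw.1 hkc hkf hvict)
        have : p.1 ≠ (((1 : Int), normKey t ++ "=") : Int × String) := by
          rw [hkey]
          intro hh
          exact hne (by injection hh)
        simp [this]
      · have hpkf : isK p = false := by revert hpk; cases isK p <;> simp
        have := not_isK_ne_one hpkf (normKey t ++ "=")
        simp [this]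
    have herd : e.erase ((1 : Int), normKey t ++ "=") = e := PySem.Dict.ext herased
    rw [herd]
    by_cases hc0 : e.contains ((0 : Int), normKey t) = true
    · have hitems := PySem.Dict.items_insert_of_contains e ((j : Int), t) hc0
      refine ⟨?_, ?_, ?_⟩
      · rw [hitems, filter_map_swap, hacc]
        have hpred : ∀ p ∈ e.items,
            (isK (if p.1 == (((0 : Int), normKey t) : Int × String)
                then ((((0 : Int), normKey t) : Int × String), (j, t)) else p))
              = isK p := by
          intro p _
          by_cases hb : (p.1 == (((0 : Int), normKey t) : Int × String)) = true
          · have : p.1 = ((0 : Int), normKey t) := beq_iff_eq.mp hb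
            rw [if_pos hb, isK, isK, this]
          · have hbf : (p.1 == (((0 : Int), normKey t) : Int × String)) = false := by
              revert hb; cases (p.1 == (((0 : Int), normKey t) : Int × String)) <;> simp
            rw [hbf]
            simp
        rw [List.filter_congr hpred]
        congr 1
        refine ((List.map_congr_left ?_).trans (List.map_id _)).symm
        intro p hp
        have hpk := (List.mem_filter.mp hp).2
        have hpm := (List.mem_filter.mp hp).1
        have hkey := (isK_entry_key (hwfe p hpm) hpk).1
        have : (p.1 == (((0 : Int), normKey t) : Int × String)) = false := by
          apply beq_eq_false_iff_ne.mpr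
          rw [hkey]
          intro hh
          have := congrArg Prod.fst hh
          simp at this
        simp [this]
      · intro t'
        rw [hseen, PySem.Dict.contains_insert]
        have : ((((1 : Int), t') : Int × String) == ((0 : Int), normKey t)) = false := by
          apply beq_eq_false_iff_ne.mpr
          intro hh
          have := congrArg Prod.fst hh
          simp at this
        rw [this, Bool.false_or]
      · intro p hp hpk
        rw [hitems] at hp
        obtain ⟨q, hq, hqe⟩ := List.mem_map.mp hp
        by_cases hb : (q.1 == (((0 : Int), normKey t) : Int × String)) = true
        · rw [if_pos hb] at hqe
          rw [← hqe] at hpk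
          simp [isK] at hpk
        · have hbf : (q.1 == (((0 : Int), normKey t) : Int × String)) = false := by
            revert hb; cases (q.1 == (((0 : Int), normKey t) : Int × String)) <;> simp
          rw [hbf] at hqe
          simp only [Bool.false_eq_true, if_false] at hqe
          subst hqe
          exact hval q hq hpk
    · have hc0f : e.contains ((0 : Int), normKey t) = false := by
        revert hc0; cases e.contains ((0 : Int), normKey t) <;> simp
      have hitems := PySem.Dict.items_insert_of_not_contains e ((j : Int), t) hc0f
      refine ⟨?_, ?_, ?_⟩
      · rw [hitems, List.filter_append, hacc]
        have : ([((((0 : Int), normKey t) : Int × String), ((j : Int), t))].filter isK) = [] := by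
          simp [isK]
        rw [this, List.append_nil]
      · intro t'
        rw [hseen, PySem.Dict.contains_insert]
        have : ((((1 : Int), t') : Int × String) == ((0 : Int), normKey t)) = false := by
          apply beq_eq_false_iff_ne.mpr
          intro hh
          have := congrArg Prod.fst hh
          simp at this
        rw [this, Bool.false_or]
      · intro p hp hpk
        rw [hitems] at hp
        rcases List.mem_append.mp hp with h | h
        · exact hval p h hpk
        · rw [List.mem_singleton] at h
          subst h
          simp [isK] at hpk

theorem keep_sync_loop (am tags : List String) (hND : ¬ D_organize_subtags tags am) :
    ∀ (rest : List String) (e : PySem.Dict (Int × String) (Int × String))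
      (st : PySem.Set String × List (Int × String)) (i : Int),
      Wf am e i → KInv am tags e st →
      (∀ p ∈ PySem.List.enumerate rest i, p ∈ PySem.List.enumerate tags 0) →
      KInv am tags ((PySem.List.enumerate rest i).foldl (mStep am) e)
        ((PySem.List.enumerate rest i).foldl (keepStep am) st) := by
  intro rest
  induction rest with
  | nil => intro e st i _ hinv _; simpa using hinv
  | cons t rest ih =>
    intro e st i hwf hinv hsub
    have henum : PySem.List.enumerate (t :: rest) i
        = (i, t) :: PySem.List.enumerate rest (i + 1) := rfl
    rw [henum] at hsub ⊢
    simp only [List.foldl_cons]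
    exact ih (mStep am e (i, t)) (keepStep am st (i, t)) (i + 1)
      (Wf_step am e i t hwf)
      (keep_sync_step am tags hND e st i t hwf hinv (hsub _ (List.mem_cons_self)))
      (fun p hp => hsub p (List.mem_cons_of_mem _ hp))

-- ---------- generic shape facts about the two passes ----------
theorem keepStep_sublist (am : List String) :
    ∀ (M : List (Int × String)) (st : PySem.Set String × List (Int × String)),
      ∃ sub, (M.foldl (keepStep am) st).2 = st.2 ++ sub ∧ sub.Sublist M := by
  intro M
  induction M with
  | nil => intro st; exact ⟨[], by simp, List.nil_sublist _⟩
  | cons x M ih =>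
    intro st
    simp only [List.foldl_cons]
    rcases ih (keepStep am st x) with ⟨sub, hs, hsub⟩
    by_cases hc : ((tagKey am x.2).isNone && !(PySem.Set.contains st.1 x.2)) = true
    · refine ⟨x :: sub, ?_, List.cons_sublist_cons.mpr hsub⟩
      rw [hs, keepStep, if_pos hc]
      simp
    · refine ⟨sub, ?_, hsub.cons x⟩
      rw [hs, keepStep, if_neg hc]

theorem keyedStep_sublist (am : List String) :
    ∀ (M : List (Int × String)) (st : PySem.Set String × List (Int × String)),
      ∃ sub, (M.foldl (keyedStep am) st).2 = st.2 ++ sub ∧ sub.Sublist M := by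
  intro M
  induction M with
  | nil => intro st; exact ⟨[], by simp, List.nil_sublist _⟩
  | cons x M ih =>
    intro st
    simp only [List.foldl_cons]
    rcases ih (keyedStep am st x) with ⟨sub, hs, hsub⟩
    have hcase : (keyedStep am st x).2 = st.2 ∨ (keyedStep am st x).2 = st.2 ++ [x] := by
      rw [keyedStep]
      rcases htk : tagKey am x.2 with _ | k
      · exact Or.inl rfl
      · simp only []
        by_cases hc : (!(PySem.Set.contains st.1 k)) = true
        · rw [if_pos hc]; exact Or.inr rfl
        · rw [if_neg hc]; exact Or.inl rfl
    rcases hcase with h | h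
    · refine ⟨sub, ?_, hsub.cons x⟩
      rw [hs, h]
    · refine ⟨x :: sub, ?_, List.cons_sublist_cons.mpr hsub⟩
      rw [hs, h]
      simp

-- ---------- the backward pass: membership characterisation ----------
theorem keyed_mem (am : List String) :
    ∀ (M : List (Int × String)), M.Pairwise (fun a b => b.1 < a.1) →
    ∀ (s : PySem.Set String) (acc : List (Int × String)) (x : Int × String),
      (x ∈ (M.foldl (keyedStep am) (s, acc)).2 ↔
        x ∈ acc ∨ (x ∈ M ∧ keepCls am x.2 = false ∧
          PySem.Set.contains s (normKey x.2) = false ∧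
          ∀ q ∈ M, keepCls am q.2 = false → normKey q.2 = normKey x.2 → q.1 ≤ x.1)) := by
  intro M
  induction M with
  | nil => intro _ s acc x; simp
  | cons y M ih =>
    intro hpw s acc x
    obtain ⟨hhead, htail⟩ := List.pairwise_cons.mp hpw
    simp only [List.foldl_cons]
    rw [keyedStep, tagKey_eq]
    by_cases hky : keepCls am y.2 = true
    · rw [if_pos hky]
      rw [ih htail s acc x]
      constructor
      · rintro (h | ⟨hm, hr, hs, hl⟩)
        · exact Or.inl h
        · refine Or.inr ⟨List.mem_cons_of_mem _ hm, hr, hs, ?_⟩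
          intro q hq hqr hqn
          rcases List.mem_cons.mp hq with rfl | hq'
          · rw [hky] at hqr; exact absurd hqr (by simp)
          · exact hl q hq' hqr hqn
      · rintro (h | ⟨hm, hr, hs, hl⟩)
        · exact Or.inl h
        · rcases List.mem_cons.mp hm with rfl | hm'
          · rw [hky] at hr; exact absurd hr (by simp)
          · exact Or.inr ⟨hm', hr, hs, fun q hq => hl q (List.mem_cons_of_mem _ hq)⟩
    · have hkyf : keepCls am y.2 = false := by revert hky; cases keepCls am y.2 <;> simp
      rw [if_neg hky]
      simp only []
      by_cases hcy : PySem.Set.contains s (normKey y.2) = true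
      · rw [if_neg (by rw [hcy]; simp)]
        rw [ih htail s acc x]
        constructor
        · rintro (h | ⟨hm, hr, hs, hl⟩)
          · exact Or.inl h
          · refine Or.inr ⟨List.mem_cons_of_mem _ hm, hr, hs, ?_⟩
            intro q hq hqr hqn
            rcases List.mem_cons.mp hq with rfl | hq'
            · rw [hqn] at hcy
              rw [hcy] at hs
              exact absurd hs (by simp)
            · exact hl q hq' hqr hqn
        · rintro (h | ⟨hm, hr, hs, hl⟩)
          · exact Or.inl h
          · rcases List.mem_cons.mp hm with rfl | hm'
            · rw [hcy] at hs; exact absurd hs (by simp)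
            · exact Or.inr ⟨hm', hr, hs, fun q hq => hl q (List.mem_cons_of_mem _ hq)⟩
      · have hcyf : PySem.Set.contains s (normKey y.2) = false := by
          revert hcy; cases PySem.Set.contains s (normKey y.2) <;> simp
        rw [if_pos (by rw [hcyf]; simp)]
        rw [ih htail (PySem.Set.add s (normKey y.2)) (acc ++ [y]) x]
        constructor
        · rintro (h | ⟨hm, hr, hs, hl⟩)
          · rcases List.mem_append.mp h with h' | h'
            · exact Or.inl h'
            · rw [List.mem_singleton] at h'
              subst h'
              refine Or.inr ⟨List.mem_cons_self, hkyf, hcyf, ?_⟩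
              intro q hq hqr hqn
              rcases List.mem_cons.mp hq with rfl | hq'
              · exact le_refl _
              · exact le_of_lt (hhead q hq')
          · rw [set_contains_add, Bool.or_eq_false_iff] at hs
            obtain ⟨hs1, hs2⟩ := hs
            refine Or.inr ⟨List.mem_cons_of_mem _ hm, hr, hs1, ?_⟩
            intro q hq hqr hqn
            rcases List.mem_cons.mp hq with rfl | hq'
            · rw [hqn] at hs2
              exact absurd hs2 (by simp)
            · exact hl q hq' hqr hqn
        · rintro (h | ⟨hm, hr, hs, hl⟩)
          · exact Or.inl (List.mem_append.mpr (Or.inl h))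
          · rcases List.mem_cons.mp hm with rfl | hm'
            · exact Or.inl (List.mem_append.mpr (Or.inr (List.mem_singleton.mpr rfl)))
            · have hxy : x.1 < y.1 := hhead x hm'
              have hnn : normKey x.2 ≠ normKey y.2 := by
                intro hh
                have := hl y List.mem_cons_self hkyf hh.symm
                omega
              refine Or.inr ⟨hm', hr, ?_, fun q hq => hl q (List.mem_cons_of_mem _ hq)⟩
              rw [set_contains_add, hs]
              simp [beq_eq_false_iff_ne.mpr hnn]

-- ---------- the forward model: replace-entry membership characterisation ----------
def Efold (am ts : List String) : PySem.Dict (Int × String) (Int × String) :=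
  (PySem.List.enumerate ts 0).foldl (mStep am) PySem.Dict.empty

theorem Efold_wf (am ts : List String) : Wf am (Efold am ts) (ts.length : Int) := by
  have h0 : Wf am PySem.Dict.empty 0 := by
    refine ⟨?_, ?_, ?_⟩ <;> simp [PySem.Dict.empty, PySem.Dict.keys]
  have := (loop_main am ts PySem.Dict.empty PySem.Dict.empty 0 rfl h0).2
  rwa [zero_add] at this

-- x was the last replace-occurrence of its key within ts (position-indexed, closed form)
def LastP (am ts : List String) (x : Int × String) : Prop :=
  x ∈ PySem.List.enumerate ts 0 ∧ keepCls am x.2 = false ∧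
  ∀ q ∈ PySem.List.enumerate ts 0, keepCls am q.2 = false →
    normKey q.2 = normKey x.2 → q.1 ≤ x.1

theorem enumerate_fst_lt (ts : List String) (q : Int × String)
    (h : q ∈ PySem.List.enumerate ts 0) : q.1 < (ts.length : Int) ∧ 0 ≤ q.1 := by
  rw [PySem.List.mem_enumerate_iff] at h
  obtain ⟨k, hk, hq⟩ := h
  have h1 := congrArg Prod.fst hq
  simp at h1
  omega

theorem enumerate_snoc (ts : List String) (t : String) :
    PySem.List.enumerate (ts ++ [t]) 0
      = PySem.List.enumerate ts 0 ++ [((ts.length : Int), t)] := by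
  rw [PySem.List.enumerate_append]
  congr 1
  show PySem.List.enumerate [t] (0 + (ts.length : Int)) = _
  rw [zero_add]
  rfl

theorem lastP_snoc (am ts : List String) (t : String) (x : Int × String)
    (hk : keepCls am t = false) :
    LastP am (ts ++ [t]) x ↔
      x = (((ts.length : Int)), t) ∨ (LastP am ts x ∧ normKey x.2 ≠ normKey t) := by
  rw [LastP, LastP, enumerate_snoc]
  constructor
  · rintro ⟨hm, hr, hl⟩
    rcases List.mem_append.mp hm with hm' | hm'
    · refine Or.inr ⟨⟨hm', hr, fun q hq hqr hqn => hl q (List.mem_append.mpr (Or.inl hq)) hqr hqn⟩, ?_⟩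
      intro hh
      have hle := hl ((ts.length : Int), t)
        (List.mem_append.mpr (Or.inr (List.mem_singleton.mpr rfl))) hk hh.symm
      have hlt := (enumerate_fst_lt ts x hm').1
      simp only at hle
      omega
    · exact Or.inl (List.mem_singleton.mp hm')
  · rintro (rfl | ⟨⟨hm, hr, hl⟩, hne⟩)
    · refine ⟨List.mem_append.mpr (Or.inr (List.mem_singleton.mpr rfl)), hk, ?_⟩
      intro q hq hqr hqn
      rcases List.mem_append.mp hq with hq' | hq'
      · exact le_of_lt (by simpa using (enumerate_fst_lt ts q hq').1)
      · rw [List.mem_singleton.mp hq']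
    · refine ⟨List.mem_append.mpr (Or.inl hm), hr, ?_⟩
      intro q hq hqr hqn
      rcases List.mem_append.mp hq with hq' | hq'
      · exact hl q hq' hqr hqn
      · rw [List.mem_singleton.mp hq'] at hqn
        exact absurd hqn.symm hne

theorem erase_one_filter_not_isK (e : PySem.Dict (Int × String) (Int × String)) (k : String) :
    (e.erase ((1 : Int), k)).items.filter (fun p => !(isK p))
      = e.items.filter (fun p => !(isK p)) := by
  rw [erase_items, List.filter_filter]
  apply List.filter_congr
  intro p _
  by_cases hpk : isK p = true
  · simp [hpk]
  · have hpkf : isK p = false := by revert hpk; cases isK p <;> simp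
    have := not_isK_ne_one hpkf k
    simp [hpkf, beq_eq_false_iff_ne.mpr this]

theorem cls0_mem (am : List String) (ts : List String) (x : Int × String) :
    x ∈ ((Efold am ts).items.filter (fun p => !(isK p))).map Prod.snd ↔ LastP am ts x := by
  induction ts using List.reverseRecOn with
  | nil =>
    simp [Efold, PySem.Dict.empty, LastP]
  | append_singleton ts t ih =>
    obtain ⟨hknd, hpos, hwfe⟩ := Efold_wf am ts
    have hunf : Efold am (ts ++ [t]) = mStep am (Efold am ts) ((ts.length : Int), t) := by
      rw [Efold, enumerate_snoc, List.foldl_append]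
      rfl
    rw [hunf, mStep_eq]
    by_cases hk : keepCls am t = true
    · rw [if_pos hk]
      have hsame : ((Efold am ts).setdefault ((1 : Int), t) ((ts.length : Int), t)).items.filter
            (fun p => !(isK p)) = (Efold am ts).items.filter (fun p => !(isK p)) := by
        by_cases hc : (Efold am ts).contains ((1 : Int), t) = true
        · rw [PySem.Dict.setdefault_of_contains _ _ hc]
        · have hcf : (Efold am ts).contains ((1 : Int), t) = false := by
            revert hc; cases (Efold am ts).contains ((1 : Int), t) <;> simp
          rw [PySem.Dict.setdefault_of_not_contains _ _ hcf,
            PySem.Dict.items_insert_of_not_contains _ _ hcf, List.filter_append]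
          simp [isK]
      rw [hsame, ih]
      rw [LastP, LastP, enumerate_snoc]
      constructor
      · rintro ⟨hm, hr, hl⟩
        refine ⟨List.mem_append.mpr (Or.inl hm), hr, ?_⟩
        intro q hq hqr hqn
        rcases List.mem_append.mp hq with hq' | hq'
        · exact hl q hq' hqr hqn
        · rw [List.mem_singleton.mp hq'] at hqr
          simp only at hqr
          rw [hk] at hqr
          exact absurd hqr (by simp)
      · rintro ⟨hm, hr, hl⟩
        rcases List.mem_append.mp hm with hm' | hm'
        · exact ⟨hm', hr, fun q hq => hl q (List.mem_append.mpr (Or.inl hq))⟩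
        · rw [List.mem_singleton.mp hm'] at hr
          simp only at hr
          rw [hk] at hr
          exact absurd hr (by simp)
    · have hkf : keepCls am t = false := by revert hk; cases keepCls am t <;> simp
      rw [if_neg hk]
      rw [lastP_snoc am ts t x hkf]
      have hera : ((Efold am ts).erase ((1 : Int), normKey t ++ "=")).items.filter
            (fun p => !(isK p))
          = (Efold am ts).items.filter (fun p => !(isK p)) := erase_one_filter_not_isK _ _
      have hold_key : ∀ p ∈ (Efold am ts).items, isK p = false →
          (p.1 == (((0 : Int), normKey t) : Int × String)) = (normKey p.2.2 == normKey t) := by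
        intro p hp hpkf
        obtain ⟨hkey, -⟩ := cls0_entry_key (hwfe p hp) hpkf
        by_cases hh : normKey p.2.2 = normKey t
        · rw [beq_iff_eq.mpr hh, beq_iff_eq.mpr (by rw [hkey, hh])]
        · rw [beq_eq_false_iff_ne.mpr hh, beq_eq_false_iff_ne.mpr (by
            rw [hkey]; intro hc; exact hh (by injection hc))]
      have hcont_eq : ((Efold am ts).erase ((1 : Int), normKey t ++ "=")).contains
            ((0 : Int), normKey t) = (Efold am ts).contains ((0 : Int), normKey t) := by
        rw [Bool.eq_iff_iff, PySem.Dict.contains_iff_mem_keys, PySem.Dict.contains_iff_mem_keys]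
        show _ ∈ ((Efold am ts).erase _).items.map Prod.fst ↔ _ ∈ (Efold am ts).items.map Prod.fst
        rw [erase_items]
        constructor
        · rintro hmem
          obtain ⟨p, hp, hpe⟩ := List.mem_map.mp hmem
          exact List.mem_map.mpr ⟨p, List.mem_of_mem_filter hp, hpe⟩
        · rintro hmem
          obtain ⟨p, hp, hpe⟩ := List.mem_map.mp hmem
          refine List.mem_map.mpr ⟨p, List.mem_filter.mpr ⟨hp, ?_⟩, hpe⟩
          have : p.1 ≠ (((1 : Int), normKey t ++ "=") : Int × String) := by
            rw [hpe]
            intro hh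
            have := congrArg Prod.fst hh
            simp at this
          simp [this]
      by_cases hc0 : (Efold am ts).contains ((0 : Int), normKey t) = true
      · have hc0' : ((Efold am ts).erase ((1 : Int), normKey t ++ "=")).contains
            ((0 : Int), normKey t) = true := by rw [hcont_eq]; exact hc0
        rw [PySem.Dict.items_insert_of_contains _ _ hc0']
        rw [filter_map_swap]
        have hpred : ∀ p ∈ ((Efold am ts).erase ((1 : Int), normKey t ++ "=")).items,
            (!(isK (if p.1 == (((0 : Int), normKey t) : Int × String)
                then ((((0 : Int), normKey t) : Int × String), ((ts.length : Int), t)) else p)))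
              = !(isK p) := by
          intro p _
          by_cases hb : (p.1 == (((0 : Int), normKey t) : Int × String)) = true
          · have heq : p.1 = ((0 : Int), normKey t) := beq_iff_eq.mp hb
            rw [if_pos hb, isK, isK, heq]
          · have hbf : (p.1 == (((0 : Int), normKey t) : Int × String)) = false := by
              revert hb; cases (p.1 == (((0 : Int), normKey t) : Int × String)) <;> simp
            rw [hbf]
            simp
        rw [List.filter_congr hpred]
        constructor
        · intro hx
          rw [List.map_map] at hx
          obtain ⟨p, hp, hpe⟩ := List.mem_map.mp hx
          have hpm0 := (List.mem_filter.mp hp).1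
          have hpk := (List.mem_filter.mp hp).2
          have hpkf : isK p = false := by revert hpk; cases isK p <;> simp
          have hpfull : p ∈ (Efold am ts).items := mem_erase_items _ _ hpm0
          by_cases hb : (p.1 == (((0 : Int), normKey t) : Int × String)) = true
          · left
            rw [Function.comp_apply, if_pos hb] at hpe
            rw [← hpe]
          · right
            have hbf : (p.1 == (((0 : Int), normKey t) : Int × String)) = false := by
              revert hb; cases (p.1 == (((0 : Int), normKey t) : Int × String)) <;> simp
            rw [Function.comp_apply, hbf] at hpe
            simp only [Bool.false_eq_true, if_false] at hpe
            have hxk : normKey x.2 ≠ normKey t := by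
              have hkk := hold_key p hpfull hpkf
              rw [hbf] at hkk
              have hne := beq_eq_false_iff_ne.mp hkk.symm
              rw [← hpe]
              exact hne
            have hxm : x ∈ ((Efold am ts).items.filter (fun p => !(isK p))).map Prod.snd := by
              rw [← hera]
              exact List.mem_map.mpr ⟨p, hp, hpe⟩
            exact ⟨ih.mp hxm, hxk⟩
        · rintro (rfl | ⟨hlast, hne⟩)
          · have hmemk : (((0 : Int), normKey t) : Int × String)
                ∈ ((Efold am ts).erase ((1 : Int), normKey t ++ "=")).items.map Prod.fst := by
              have := (PySem.Dict.contains_iff_mem_keys _ _).mp hc0'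
              simpa [PySem.Dict.keys] using this
            obtain ⟨p, hp, hpe⟩ := List.mem_map.mp hmemk
            have hpkf : isK p = false := by
              rw [isK, hpe]
              rfl
            rw [List.map_map]
            refine List.mem_map.mpr ⟨p, List.mem_filter.mpr ⟨hp, by rw [hpkf]; rfl⟩, ?_⟩
            rw [Function.comp_apply, if_pos (beq_iff_eq.mpr hpe)]
          · have hxm : x ∈ ((Efold am ts).items.filter (fun p => !(isK p))).map Prod.snd :=
              ih.mpr hlast
            rw [← hera] at hxm
            obtain ⟨p, hp, hpe⟩ := List.mem_map.mp hxm
            have hpm0 := (List.mem_filter.mp hp).1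
            have hpk := (List.mem_filter.mp hp).2
            have hpkf : isK p = false := by revert hpk; cases isK p <;> simp
            have hpfull : p ∈ (Efold am ts).items := mem_erase_items _ _ hpm0
            have hbf : (p.1 == (((0 : Int), normKey t) : Int × String)) = false := by
              rw [hold_key p hpfull hpkf, hpe]
              exact beq_eq_false_iff_ne.mpr hne
            rw [List.map_map]
            refine List.mem_map.mpr ⟨p, hp, ?_⟩
            rw [Function.comp_apply, hbf]
            simpa using hpe
      · have hc0' : ((Efold am ts).erase ((1 : Int), normKey t ++ "=")).contains
            ((0 : Int), normKey t) = false := by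
          rw [hcont_eq]
          revert hc0; cases (Efold am ts).contains ((0 : Int), normKey t) <;> simp
        rw [PySem.Dict.items_insert_of_not_contains _ _ hc0']
        rw [List.filter_append]
        have hnew : ([((((0 : Int), normKey t) : Int × String), ((ts.length : Int), t))].filter
            (fun p => !(isK p))) = [((((0 : Int), normKey t) : Int × String), ((ts.length : Int), t))] := by
          simp [isK]
        rw [hnew, List.map_append, hera]
        constructor
        · intro hx
          rcases List.mem_append.mp hx with hx' | hx'
          · right
            have hlast := ih.mp hx'
            refine ⟨hlast, ?_⟩
            intro hxe
            obtain ⟨p, hp, hpe⟩ := List.mem_map.mp hx'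
            have hpm := (List.mem_filter.mp hp).1
            have hpk := (List.mem_filter.mp hp).2
            have hpkf : isK p = false := by revert hpk; cases isK p <;> simp
            have hkk := hold_key p hpm hpkf
            rw [hpe, beq_iff_eq.mpr hxe] at hkk
            have hb : (p.1 == (((0 : Int), normKey t) : Int × String)) = true := by rw [hkk]
            have hcc : (Efold am ts).contains ((0 : Int), normKey t) = true := by
              apply (PySem.Dict.contains_iff_mem_keys _ _).mpr
              have : (((0 : Int), normKey t) : Int × String) ∈ (Efold am ts).items.map Prod.fst :=
                List.mem_map.mpr ⟨p, hpm, beq_iff_eq.mp hb⟩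
              simpa [PySem.Dict.keys] using this
            rw [hcc] at hc0
            exact hc0 rfl
          · left
            simpa using hx'
        · rintro (rfl | ⟨hlast, hne⟩)
          · exact List.mem_append.mpr (Or.inr (by simp))
          · exact List.mem_append.mpr (Or.inl (ih.mpr hlast))

-- ---------- merge: pair-valued version and its properties ----------
def mergeP : List (Int × String) → List (Int × String) → List (Int × String)
  | [], ys => ys
  | x :: xs, [] => x :: xs
  | x :: xs, y :: ys =>
      if x.1 < y.1 then x :: mergeP xs (y :: ys) else y :: mergeP (x :: xs) ys
termination_by xs ys => xs.length + ys.length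

theorem mergeTags_eq_mergeP :
    ∀ (xs ys : List (Int × String)), mergeTags xs ys = (mergeP xs ys).map Prod.snd := by
  intro xs ys
  induction xs, ys using mergeP.induct with
  | case1 ys => cases ys <;> simp [mergeTags, mergeP]
  | case2 x xs => simp [mergeTags, mergeP]
  | case3 x xs y ys hlt ih =>
    rw [mergeTags.eq_def, mergeP.eq_def]
    simp only [hlt, if_true]
    rw [ih]
    rfl
  | case4 x xs y ys hlt ih =>
    rw [mergeTags.eq_def, mergeP.eq_def]
    simp only [hlt, if_false]
    rw [ih]
    rfl

theorem mergeP_perm : ∀ (xs ys : List (Int × String)), (mergeP xs ys).Perm (xs ++ ys) := by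
  intro xs ys
  induction xs, ys using mergeP.induct with
  | case1 ys => simp [mergeP]
  | case2 x xs => simp [mergeP]
  | case3 x xs y ys hlt ih =>
    rw [mergeP.eq_def]
    simp only [hlt, if_true]
    exact (ih.cons x)
  | case4 x xs y ys hlt ih =>
    rw [mergeP.eq_def]
    simp only [hlt, if_false]
    refine (ih.cons y).trans ?_
    exact List.perm_middle.symm

theorem mergeP_mem {xs ys : List (Int × String)} {z : Int × String}
    (h : z ∈ mergeP xs ys) : z ∈ xs ∨ z ∈ ys := by
  have := (mergeP_perm xs ys).mem_iff.mp h
  exact List.mem_append.mp this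

theorem mergeP_pairwise : ∀ (xs ys : List (Int × String)),
    xs.Pairwise (fun a b => a.1 < b.1) → ys.Pairwise (fun a b => a.1 < b.1) →
    (∀ a ∈ xs, ∀ b ∈ ys, a.1 ≠ b.1) →
    (mergeP xs ys).Pairwise (fun a b => a.1 < b.1) := by
  intro xs ys
  induction xs, ys using mergeP.induct with
  | case1 ys => intro _ hy _; simpa [mergeP] using hy
  | case2 x xs => intro hx _ _; simpa [mergeP] using hx
  | case3 x xs y ys hlt ih =>
    intro hx hy hd
    rw [mergeP.eq_def]
    simp only [hlt, if_true]
    obtain ⟨hxh, hxt⟩ := List.pairwise_cons.mp hx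
    refine List.pairwise_cons.mpr ⟨?_, ih hxt hy (fun a ha => hd a (List.mem_cons_of_mem _ ha))⟩
    intro z hz
    rcases mergeP_mem hz with h | h
    · exact hxh z h
    · rcases List.mem_cons.mp h with rfl | h'
      · exact hlt
      · exact lt_trans hlt ((List.pairwise_cons.mp hy).1 z h')
  | case4 x xs y ys hlt ih =>
    intro hx hy hd
    rw [mergeP.eq_def]
    simp only [hlt, if_false]
    obtain ⟨hyh, hyt⟩ := List.pairwise_cons.mp hy
    have hylt : y.1 < x.1 := by
      have hne := hd x List.mem_cons_self y List.mem_cons_self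
      simp only [not_lt] at hlt
      omega
    refine List.pairwise_cons.mpr ⟨?_, ih hx hyt
      (fun a ha b hb => hd a ha b (List.mem_cons_of_mem _ hb))⟩
    intro z hz
    rcases mergeP_mem hz with h | h
    · rcases List.mem_cons.mp h with rfl | h'
      · exact hylt
      · exact lt_trans hylt ((List.pairwise_cons.mp hx).1 z h')
    · exact hyh z h

-- ---------- assembling the equivalence outside D_ ----------
theorem aStep_ne_nil (am : List String) (d : PySem.Dict String String) (t : String) :
    (aStep am d t).items ≠ [] := by
  rw [aStep_eq]
  by_cases hk : keepCls am t = true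
  · rw [if_pos hk]
    by_cases hc : d.contains t = true
    · rw [PySem.Dict.items_insert_of_contains d t hc]
      intro h
      have : t ∈ d.items.map Prod.fst := by
        simpa [PySem.Dict.keys] using (PySem.Dict.contains_iff_mem_keys d t).mp hc
      obtain ⟨p, hp, -⟩ := List.mem_map.mp this
      rw [List.map_eq_nil_iff.mp h] at hp
      exact absurd hp List.not_mem_nil
    · have hcf : d.contains t = false := by revert hc; cases d.contains t <;> simp
      rw [PySem.Dict.items_insert_of_not_contains d t hcf]
      simp
  · rw [if_neg hk]
    set d2 := (d.erase (normKey t ++ ":")).erase (normKey t ++ "=") with hd2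
    by_cases hc : d2.contains (aKey t) = true
    · rw [PySem.Dict.items_insert_of_contains d2 t hc]
      intro h
      have : aKey t ∈ d2.items.map Prod.fst := by
        simpa [PySem.Dict.keys] using (PySem.Dict.contains_iff_mem_keys d2 _).mp hc
      obtain ⟨p, hp, -⟩ := List.mem_map.mp this
      rw [List.map_eq_nil_iff.mp h] at hp
      exact absurd hp List.not_mem_nil
    · have hcf : d2.contains (aKey t) = false := by revert hc; cases d2.contains (aKey t) <;> simp
      rw [PySem.Dict.items_insert_of_not_contains d2 t hcf]
      simp

theorem enumerate_nodup (ts : List String) : (PySem.List.enumerate ts 0).Nodup :=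
  (PySem.List.pairwise_lt_enumerate ts 0).imp (fun h => by
    intro he; rw [he] at h; exact lt_irrefl _ h)

theorem enumerate_fst_nodup (ts : List String) :
    ((PySem.List.enumerate ts 0).map Prod.fst).Nodup := by
  have := List.pairwise_map.mpr (PySem.List.pairwise_lt_enumerate ts 0)
  exact this.imp (fun h => by intro he; rw [he] at h; exact lt_irrefl _ h)

theorem main_equiv (tags am : List String) (hND : ¬ D_organize_subtags tags am) :
    organize_subtags tags am = organize_subtags_alt tags am := by
  rcases List.eq_nil_or_concat tags with rfl | ⟨ts, t, htags⟩
  · rw [organize_subtags, organize_subtags_alt]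
    simp [mergeTags, PySem.Dict.empty]
  · obtain ⟨hknd, hpos, hwfe⟩ := Efold_wf am tags
    have hwfE' : Wf am (Efold am tags) (tags.length : Int) := ⟨hknd, hpos, hwfe⟩
    have h0 : Wf am PySem.Dict.empty 0 := by
      refine ⟨?_, ?_, ?_⟩ <;> simp [PySem.Dict.empty, PySem.Dict.keys]
    have hdE : (tags.foldl (aStep am) PySem.Dict.empty).items = render (Efold am tags) :=
      (loop_main am tags PySem.Dict.empty PySem.Dict.empty 0 rfl h0).1
    have hdne : (tags.foldl (aStep am) (PySem.Dict.empty : PySem.Dict String String)).items ≠ [] := by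
      rw [htags, List.concat_eq_append, List.foldl_append]
      simp only [List.foldl_cons, List.foldl_nil]
      exact aStep_ne_nil am _ t
    -- B's kept list equals the model's keep-entries
    have hKinv0 : KInv am tags PySem.Dict.empty (PySem.Set.empty, []) := by
      refine ⟨rfl, ?_, ?_⟩
      · intro t'; rfl
      · intro p hp; simp [PySem.Dict.empty] at hp
    have hK := keep_sync_loop am tags hND tags PySem.Dict.empty (PySem.Set.empty, []) 0
      h0 hKinv0 (fun p hp => hp)
    set kept := ((PySem.List.enumerate tags 0).foldl (keepStep am) (PySem.Set.empty, [])).2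
      with hkept_def
    have hkeptE : kept = ((Efold am tags).items.filter isK).map Prod.snd := hK.1
    -- B's keyed list: a permutation of the model's replace-entries
    set keyedRaw := (((PySem.List.enumerate tags 0).reverse).foldl (keyedStep am)
      (PySem.Set.empty, [])).2 with hkraw_def
    set keyed := keyedRaw.reverse with hkeyed_def
    have hrevpw : ((PySem.List.enumerate tags 0).reverse).Pairwise (fun a b => b.1 < a.1) :=
      (List.pairwise_reverse).mpr (PySem.List.pairwise_lt_enumerate tags 0)
    have hkmem : ∀ x, x ∈ keyed ↔ LastP am tags x := by
      intro x
      have h1 : x ∈ keyed ↔ x ∈ keyedRaw := List.mem_reverse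
      rw [h1, hkraw_def,
        keyed_mem am ((PySem.List.enumerate tags 0).reverse) hrevpw PySem.Set.empty [] x]
      rw [LastP]
      constructor
      · rintro (h | ⟨hm, hr, -, hl⟩)
        · exact absurd h List.not_mem_nil
        · exact ⟨List.mem_reverse.mp hm, hr,
            fun q hq => hl q (List.mem_reverse.mpr hq)⟩
      · rintro ⟨hm, hr, hl⟩
        exact Or.inr ⟨List.mem_reverse.mpr hm, hr, rfl,
          fun q hq => hl q (List.mem_reverse.mp hq)⟩
    -- nodups and orders
    have hLnd : (PySem.List.enumerate tags 0).Nodup := enumerate_nodup tags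
    obtain ⟨ksub, hksub_eq, hksub⟩ :=
      keepStep_sublist am (PySem.List.enumerate tags 0) (PySem.Set.empty, [])
    have hkept_sub : kept.Sublist (PySem.List.enumerate tags 0) := by
      rw [hkept_def, hksub_eq]
      simpa using hksub
    obtain ⟨rsub, hrsub_eq, hrsub⟩ :=
      keyedStep_sublist am ((PySem.List.enumerate tags 0).reverse) (PySem.Set.empty, [])
    have hraw_sub : keyedRaw.Sublist ((PySem.List.enumerate tags 0).reverse) := by
      rw [hkraw_def, hrsub_eq]
      simpa using hrsub
    have hkeyed_sub : keyed.Sublist (PySem.List.enumerate tags 0) := by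
      rw [hkeyed_def]
      have := hraw_sub.reverse
      simpa using this
    have hkept_pw : kept.Pairwise (fun a b => a.1 < b.1) :=
      (PySem.List.pairwise_lt_enumerate tags 0).sublist hkept_sub
    have hkeyed_pw : keyed.Pairwise (fun a b => a.1 < b.1) :=
      (PySem.List.pairwise_lt_enumerate tags 0).sublist hkeyed_sub
    have hkeyed_nd : keyed.Nodup := hLnd.sublist hkeyed_sub
    -- the model's replace entries, as a list
    have hcls0_nd : (((Efold am tags).items.filter (fun p => !(isK p))).map Prod.snd).Nodup := by
      have h1 : (((Efold am tags).items.filter (fun p => !(isK p))).map Prod.snd).map Prod.fst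
          = ((Efold am tags).items.filter (fun p => !(isK p))).map (fun p => p.2.1) := by
        rw [List.map_map]; rfl
      have h2 : (((Efold am tags).items.filter (fun p => !(isK p))).map (fun p => p.2.1)).Sublist
          ((Efold am tags).items.map (fun p => p.2.1)) :=
        List.Sublist.map _ List.filter_sublist
      have h3 : ((((Efold am tags).items.filter (fun p => !(isK p))).map Prod.snd).map Prod.fst).Nodup := by
        rw [h1]
        exact h2.nodup hpos
      exact h3.of_map
    have hperm0 : keyed.Perm (((Efold am tags).items.filter (fun p => !(isK p))).map Prod.snd) := by
      rw [List.perm_ext_iff_of_nodup hkeyed_nd hcls0_nd]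
      intro x
      rw [hkmem x, cls0_mem am tags x]
    -- disjointness of positions between kept and keyed
    have hdisj : ∀ a ∈ kept, ∀ b ∈ keyed, a.1 ≠ b.1 := by
      intro a ha b hb hab
      have haL : a ∈ PySem.List.enumerate tags 0 := hkept_sub.mem ha
      have hbL : b ∈ PySem.List.enumerate tags 0 := hkeyed_sub.mem hb
      have hav : a = b := nodup_key_unique _ (enumerate_fst_nodup tags) haL hbL hab
      subst hav
      rw [hkeptE] at ha
      obtain ⟨p, hp, hpe⟩ := List.mem_map.mp ha
      have hpm := (List.mem_filter.mp hp).1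
      have hpk := (List.mem_filter.mp hp).2
      obtain ⟨-, hkc⟩ := isK_entry_key (hwfe p hpm) hpk
      have hrep := ((hkmem a).mp hb).2.1
      rw [← hpe] at hrep
      rw [hkc] at hrep
      exact absurd hrep (by simp)
    -- the merged list is the sorted snd-image of the model
    have hperm1 : (kept ++ keyed).Perm ((Efold am tags).items.map Prod.snd) := by
      have h1 : (kept ++ keyed).Perm
          (kept ++ (((Efold am tags).items.filter (fun p => !(isK p))).map Prod.snd)) :=
        hperm0.append_left kept
      have h2 : kept ++ (((Efold am tags).items.filter (fun p => !(isK p))).map Prod.snd)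
          = ((Efold am tags).items.filter isK
              ++ (Efold am tags).items.filter (fun p => !(isK p))).map Prod.snd := by
        rw [hkeptE, List.map_append]
      have h3 : ((Efold am tags).items.filter isK
          ++ (Efold am tags).items.filter (fun p => !(isK p))).Perm (Efold am tags).items :=
        List.filter_append_perm isK (Efold am tags).items
      exact h1.trans (by rw [h2]; exact h3.map Prod.snd)
    have hsorted1 : PySem.List.sorted ((Efold am tags).items.map Prod.snd) (fun pv => pv.1) false
        = mergeP kept keyed := by
      apply PySem.List.sorted_eq_of_perm_of_pairwise_lt
      · exact (mergeP_perm kept keyed).trans hperm1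
      · exact mergeP_pairwise kept keyed hkept_pw hkeyed_pw hdisj
    have hsorted2 : PySem.List.sorted ((Efold am tags).items.map Prod.snd) (fun pv => pv.1) false
        = (PySem.List.sorted (Efold am tags).items (fun p => p.2.1) false).map Prod.snd := by
      apply PySem.List.sorted_eq_of_perm_of_pairwise_lt
      · exact (PySem.List.sorted_perm (Efold am tags).items (fun p => p.2.1) false).map Prod.snd
      · exact List.pairwise_map.mpr (sorted_strict (Efold am tags).items (fun p => p.2.1) hpos)
    -- conclude
    rw [organize_subtags, organize_subtags_alt]
    rw [if_neg hdne]
    rw [← hkept_def, ← hkraw_def, ← hkeyed_def]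
    rw [mergeTags_eq_mergeP, ← hsorted1, hsorted2]
    have hvals : PySem.Dict.values (tags.foldl (aStep am) PySem.Dict.empty)
        = (PySem.List.sorted (Efold am tags).items (fun p => p.2.1) false).map (fun p => p.2.2) := by
      show (tags.foldl (aStep am) PySem.Dict.empty).items.map Prod.snd = _
      rw [hdE, render, List.map_map]
      rfl
    rw [hvals, List.map_map]
    rfl


-- ===== tightness: inside D_ the two programs always differ =====
theorem max_fst_exists : ∀ (l : List (Int × String)), l ≠ [] →
    ∃ m ∈ l, ∀ y ∈ l, y.1 ≤ m.1 := by
  intro l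
  induction l with
  | nil => intro h; exact absurd rfl h
  | cons a l ih =>
    intro _
    by_cases hl : l = []
    · subst hl
      exact ⟨a, List.mem_cons_self, by
        intro y hy
        rw [List.mem_singleton.mp hy]⟩
    · obtain ⟨m, hm, hmax⟩ := ih hl
      by_cases ham : a.1 ≤ m.1
      · refine ⟨m, List.mem_cons_of_mem _ hm, ?_⟩
        intro y hy
        rcases List.mem_cons.mp hy with rfl | h
        · exact ham
        · exact hmax y h
      · refine ⟨a, List.mem_cons_self, ?_⟩
        intro y hy
        rcases List.mem_cons.mp hy with rfl | h
        · exact le_refl _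
        · exact le_trans (hmax y h) (not_le.mp ham).le

theorem min_fst_exists : ∀ (l : List (Int × String)), l ≠ [] →
    ∃ m ∈ l, ∀ y ∈ l, m.1 ≤ y.1 := by
  intro l
  induction l with
  | nil => intro h; exact absurd rfl h
  | cons a l ih =>
    intro _
    by_cases hl : l = []
    · subst hl
      exact ⟨a, List.mem_cons_self, by
        intro y hy
        rw [List.mem_singleton.mp hy]⟩
    · obtain ⟨m, hm, hmin⟩ := ih hl
      by_cases ham : m.1 ≤ a.1
      · refine ⟨m, List.mem_cons_of_mem _ hm, ?_⟩
        intro y hy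
        rcases List.mem_cons.mp hy with rfl | h
        · exact ham
        · exact hmin y h
      · refine ⟨a, List.mem_cons_self, ?_⟩
        intro y hy
        rcases List.mem_cons.mp hy with rfl | h
        · exact le_refl _
        · exact le_trans (not_le.mp ham).le (hmin y h)

-- in a list of pairs strictly increasing on the first component, with distinct second
-- components, a smaller first component means an earlier index of the second component
theorem before_of_lt : ∀ (w : List (Int × String)), w.Pairwise (fun a b => a.1 < b.1) →
    ((w.map Prod.snd).Nodup) → ∀ p q : Int × String, p ∈ w → q ∈ w → q.1 < p.1 →
    (w.map Prod.snd).idxOf q.2 < (w.map Prod.snd).idxOf p.2 := by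
  intro w
  induction w with
  | nil => intro _ _ p q hp; exact absurd hp List.not_mem_nil
  | cons a w ih =>
    intro hpw hnd p q hp hq hlt
    obtain ⟨hhead, htail⟩ := List.pairwise_cons.mp hpw
    rw [List.map_cons] at hnd
    obtain ⟨hna, hndt⟩ := List.nodup_cons.mp hnd
    by_cases hqa : q = a
    · have hpw' : p ∈ w := by
        rcases List.mem_cons.mp hp with rfl | h
        · rw [hqa] at hlt; exact absurd hlt (lt_irrefl _)
        · exact h
      have hpa : p.2 ≠ a.2 := by
        intro hh
        exact hna (hh ▸ List.mem_map_of_mem hpw')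
      rw [List.map_cons, hqa, List.idxOf_cons_self,
        List.idxOf_cons_ne _ (by simpa using hpa.symm)]
      omega
    · have hqw : q ∈ w := by
        rcases List.mem_cons.mp hq with rfl | h
        · exact absurd rfl hqa
        · exact h
      have hpa : p ≠ a := by
        rintro rfl
        have := hhead q hqw
        omega
      have hpw' : p ∈ w := by
        rcases List.mem_cons.mp hp with rfl | h
        · exact absurd rfl hpa
        · exact h
      have h1 : q.2 ≠ a.2 := by
        intro hh
        exact hna (hh ▸ List.mem_map_of_mem hqw)
      have h2 : p.2 ≠ a.2 := by
        intro hh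
        exact hna (hh ▸ List.mem_map_of_mem hpw')
      rw [List.map_cons, List.idxOf_cons_ne _ (by simpa using h1.symm),
        List.idxOf_cons_ne _ (by simpa using h2.symm)]
      exact Nat.succ_lt_succ (ih htail hndt p q hpw' hqw hlt)

-- the forward pass: membership characterisation (first occurrence of each keyless tag)
theorem kept_mem (am : List String) :
    ∀ (M : List (Int × String)), M.Pairwise (fun a b => a.1 < b.1) →
    ∀ (s : PySem.Set String) (acc : List (Int × String)) (x : Int × String),
      (x ∈ (M.foldl (keepStep am) (s, acc)).2 ↔
        x ∈ acc ∨ (x ∈ M ∧ keepCls am x.2 = true ∧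
          PySem.Set.contains s x.2 = false ∧
          ∀ q ∈ M, q.2 = x.2 → x.1 ≤ q.1)) := by
  intro M
  induction M with
  | nil => intro _ s acc x; simp
  | cons y M ih =>
    intro hpw s acc x
    obtain ⟨hhead, htail⟩ := List.pairwise_cons.mp hpw
    simp only [List.foldl_cons]
    rw [keepStep, tagKey_eq]
    by_cases hky : keepCls am y.2 = true
    · simp only [hky, if_true, Option.isNone_none, Bool.true_and]
      by_cases hcy : PySem.Set.contains s y.2 = true
      · rw [hcy]
        simp only [Bool.not_true, Bool.false_eq_true, if_false]
        rw [ih htail s acc x]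
        constructor
        · rintro (h | ⟨hm, hkc, hs, hl⟩)
          · exact Or.inl h
          · refine Or.inr ⟨List.mem_cons_of_mem _ hm, hkc, hs, ?_⟩
            intro q hq hqx
            rcases List.mem_cons.mp hq with rfl | hq'
            · rw [hqx] at hcy
              rw [hcy] at hs
              exact absurd hs (by simp)
            · exact hl q hq' hqx
        · rintro (h | ⟨hm, hkc, hs, hl⟩)
          · exact Or.inl h
          · rcases List.mem_cons.mp hm with rfl | hm'
            · rw [hcy] at hs; exact absurd hs (by simp)
            · exact Or.inr ⟨hm', hkc, hs, fun q hq => hl q (List.mem_cons_of_mem _ hq)⟩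
      · have hcyf : PySem.Set.contains s y.2 = false := by
          revert hcy; cases PySem.Set.contains s y.2 <;> simp
        rw [hcyf]
        simp only [Bool.not_false, if_true]
        rw [ih htail (PySem.Set.add s y.2) (acc ++ [y]) x]
        constructor
        · rintro (h | ⟨hm, hkc, hs, hl⟩)
          · rcases List.mem_append.mp h with h' | h'
            · exact Or.inl h'
            · rw [List.mem_singleton] at h'
              subst h'
              refine Or.inr ⟨List.mem_cons_self, hky, hcyf, ?_⟩
              intro q hq hqx
              rcases List.mem_cons.mp hq with rfl | hq'
              · exact le_refl _
              · exact le_of_lt (hhead q hq')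
          · rw [set_contains_add, Bool.or_eq_false_iff] at hs
            obtain ⟨hs1, hs2⟩ := hs
            refine Or.inr ⟨List.mem_cons_of_mem _ hm, hkc, hs1, ?_⟩
            intro q hq hqx
            rcases List.mem_cons.mp hq with rfl | hq'
            · rw [← hqx] at hs2
              exact absurd hs2 (by simp)
            · exact hl q hq' hqx
        · rintro (h | ⟨hm, hkc, hs, hl⟩)
          · exact Or.inl (List.mem_append.mpr (Or.inl h))
          · rcases List.mem_cons.mp hm with rfl | hm'
            · exact Or.inl (List.mem_append.mpr (Or.inr (List.mem_singleton.mpr rfl)))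
            · have hxy : y.1 < x.1 := hhead x hm'
              have hnn : x.2 ≠ y.2 := by
                intro hh
                have := hl y List.mem_cons_self hh.symm
                omega
              refine Or.inr ⟨hm', hkc, ?_, fun q hq => hl q (List.mem_cons_of_mem _ hq)⟩
              rw [set_contains_add, hs]
              simp [beq_eq_false_iff_ne.mpr hnn]
    · have hkyf : keepCls am y.2 = false := by revert hky; cases keepCls am y.2 <;> simp
      simp only [hkyf, Bool.false_eq_true, if_false, Option.isNone_some, Bool.false_and,
        if_false]
      rw [ih htail s acc x]
      constructor
      · rintro (h | ⟨hm, hkc, hs, hl⟩)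
        · exact Or.inl h
        · refine Or.inr ⟨List.mem_cons_of_mem _ hm, hkc, hs, ?_⟩
          intro q hq hqx
          rcases List.mem_cons.mp hq with rfl | hq'
          · rw [hqx, hkc] at hkyf
            exact absurd hkyf (by simp)
          · exact hl q hq' hqx
      · rintro (h | ⟨hm, hkc, hs, hl⟩)
        · exact Or.inl h
        · rcases List.mem_cons.mp hm with rfl | hm'
          · rw [hkc] at hkyf; exact absurd hkyf (by simp)
          · exact Or.inr ⟨hm', hkc, hs, fun q hq => hl q (List.mem_cons_of_mem _ hq)⟩

-- in A (via the model), the replace-entry of key k is always OLDER than a surviving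
-- kept tag 'k=': every occurrence of a k-keyed replace tag pops 'k=' first
def KillInv (k : String) (e : PySem.Dict (Int × String) (Int × String)) : Prop :=
  ∀ px pk : Int × String, (((1 : Int), k ++ "="), px) ∈ e.items →
    ((((0 : Int), k) : Int × String), pk) ∈ e.items → pk.1 < px.1

theorem kill_step (am : List String) (k : String)
    (e : PySem.Dict (Int × String) (Int × String)) (j : Int) (t : String)
    (hwf : Wf am e j) (hinv : KillInv k e) : KillInv k (mStep am e (j, t)) := by
  obtain ⟨hknd, hpos, hwfe⟩ := hwf
  intro px pk hx hk
  rw [mStep_eq] at hx hk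
  by_cases hkc : keepCls am t = true
  · rw [if_pos hkc] at hx hk
    by_cases hc : e.contains ((1 : Int), t) = true
    · rw [PySem.Dict.setdefault_of_contains e _ hc] at hx hk
      exact hinv px pk hx hk
    · have hcf : e.contains ((1 : Int), t) = false := by
        revert hc; cases e.contains ((1 : Int), t) <;> simp
      rw [PySem.Dict.setdefault_of_not_contains e _ hcf] at hx hk
      rcases (PySem.Dict.mem_items_insert _ _ _ _).mp hk with hkeq | ⟨hkold, -⟩
      · exfalso
        have := congrArg (fun p => p.1.1) hkeq
        simp at this
      · rcases (PySem.Dict.mem_items_insert _ _ _ _).mp hx with hxeq | ⟨hxold, -⟩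
        · have hpxj : px = (j, t) := by
            have := congrArg Prod.snd hxeq
            simpa using this
          have := (hwfe _ hkold).1
          rw [hpxj]
          simpa using this
        · exact hinv px pk hxold hkold
  · rw [if_neg hkc] at hx hk
    rcases (PySem.Dict.mem_items_insert _ _ _ _).mp hx with hxeq | ⟨hxold, -⟩
    · exfalso
      have := congrArg (fun p => p.1.1) hxeq
      simp at this
    · have hxfil := hxold
      rw [erase_items] at hxfil
      have hxe2 : (((1 : Int), k ++ "="), px) ∈ e.items := List.mem_of_mem_filter hxfil
      have hcond := (List.mem_filter.mp hxfil).2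
      have hkne : k ≠ normKey t := by
        intro hh
        rw [hh] at hcond
        simp at hcond
      rcases (PySem.Dict.mem_items_insert _ _ _ _).mp hk with hkeq | ⟨hkold, -⟩
      · exfalso
        have := congrArg (fun p => p.1.2) hkeq
        simp at this
        exact hkne this
      · exact hinv px pk hxe2 (mem_erase_items e _ hkold)

theorem kill_loop (am : List String) (k : String) :
    ∀ (rest : List String) (e : PySem.Dict (Int × String) (Int × String)) (i : Int),
      Wf am e i → KillInv k e →
      KillInv k ((PySem.List.enumerate rest i).foldl (mStep am) e) := by
  intro rest
  induction rest with
  | nil => intro e i _ hinv; simpa using hinv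
  | cons t rest ih =>
    intro e i hwf hinv
    have henum : PySem.List.enumerate (t :: rest) i
        = (i, t) :: PySem.List.enumerate rest (i + 1) := rfl
    rw [henum]
    simp only [List.foldl_cons]
    exact ih (mStep am e (i, t)) (i + 1) (Wf_step am e i t hwf)
      (kill_step am k e i t hwf hinv)

-- all of A's output strings are distinct (a value determines its dict key)
theorem A_values_nodup (am tags : List String) :
    (((PySem.List.sorted (Efold am tags).items (fun p => p.2.1) false)).map
      (fun p => p.2.2)).Nodup := by
  obtain ⟨hknd, hpos, hwfe⟩ := Efold_wf am tags
  obtain ⟨hind, hmnd⟩ := items_nodup_of_keys _ hknd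
  have hsnd : (PySem.List.sorted (Efold am tags).items (fun p => p.2.1) false).Nodup :=
    (PySem.List.sorted_perm _ _ _).nodup_iff.mpr hind
  apply (List.nodup_map_iff_inj_on hsnd).mpr
  intro p hp q hq hval
  have hp' : p ∈ (Efold am tags).items := (PySem.List.mem_sorted _ _ _ _).mp hp
  have hq' : q ∈ (Efold am tags).items := (PySem.List.mem_sorted _ _ _ _).mp hq
  by_cases hk1 : isK p = true
  · obtain ⟨hpk, hpc⟩ := isK_entry_key (hwfe p hp') hk1
    by_cases hk2 : isK q = true
    · obtain ⟨hqk, -⟩ := isK_entry_key (hwfe q hq') hk2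
      exact nodup_key_unique _ hmnd hp' hq' (by rw [hpk, hqk, hval])
    · have hk2f : isK q = false := by revert hk2; cases isK q <;> simp
      obtain ⟨-, hqc⟩ := cls0_entry_key (hwfe q hq') hk2f
      rw [← hval, hpc] at hqc
      exact absurd hqc (by simp)
  · have hk1f : isK p = false := by revert hk1; cases isK p <;> simp
    obtain ⟨hpk, hpc⟩ := cls0_entry_key (hwfe p hp') hk1f
    by_cases hk2 : isK q = true
    · obtain ⟨-, hqc⟩ := isK_entry_key (hwfe q hq') hk2
      rw [← hval, hpc] at hqc
      exact absurd hqc (by simp)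
    · have hk2f : isK q = false := by revert hk2; cases isK q <;> simp
      obtain ⟨hqk, -⟩ := cls0_entry_key (hwfe q hq') hk2f
      exact nodup_key_unique _ hmnd hp' hq' (by rw [hpk, hqk, hval])

theorem dfold_ne_nil (am tags : List String) (h : tags ≠ []) :
    (tags.foldl (aStep am) (PySem.Dict.empty : PySem.Dict String String)).items ≠ [] := by
  rcases List.eq_nil_or_concat tags with rfl | ⟨ts, t, htags⟩
  · exact absurd rfl h
  · rw [htags, List.concat_eq_append, List.foldl_append]
    simp only [List.foldl_cons, List.foldl_nil]
    exact aStep_ne_nil am _ t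

theorem tight_main (tags am : List String) (hD : D_organize_subtags tags am) :
    organize_subtags tags am ≠ organize_subtags_alt tags am := by
  obtain ⟨j, hj, i, hij, hsepD, hnamD, hxiD, a0, ha0, ha0eq⟩ := hD
  have hi : i < tags.length := lt_trans hij hj
  have hgj : tags[j]! = tags[j] := getElemBang_eq tags j hj
  have hgi : tags[i]! = tags[i] := getElemBang_eq tags i hi
  rw [hgj] at hsepD hnamD hxiD
  rw [hgi] at hxiD ha0eq
  set t := tags[j] with htdef
  set x := tags[i] with hxdef
  -- semantic facts about t and x
  have hsep : (hasColon t || hasEq t) = true := by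
    rcases hsepD with h | h
    · rw [(hasColon_iff t).mpr h]; rfl
    · rw [(hasEq_iff t).mpr h]; simp
  set k := normKey t with hkdef
  have hnamt : k ∉ am := by
    intro hmem
    exact hnamD k hmem (by rw [dKey_eq])
  have hkt : keepCls am t = false := by
    rw [keepCls]
    have h1 : (!hasColon t && !hasEq t) = false := by
      rcases Bool.or_eq_true_iff.mp hsep with h | h <;> simp [h]
    rw [h1]
    simp only [Bool.false_or]
    rw [Bool.eq_false_iff]
    intro hc
    exact hnamt (List.contains_iff_mem.mp hc)
  have hvict : x = k ++ "=" := by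
    apply String.toList_inj.mp
    rw [toList_concat_eq, hkdef, ← dKey_eq, hxiD]
  have hkx : keepCls am x = true := by
    have ha0x : normKey x ∈ am := by
      rw [dKey_eq] at ha0eq
      rw [← String.toList_inj.mp ha0eq]
      exact ha0
    rw [keepCls, List.contains_iff_mem.mpr ha0x]
    simp
  -- membership of the two tags in the enumeration
  have hmemx : ((i : Int), x) ∈ PySem.List.enumerate tags 0 := by
    rw [PySem.List.mem_enumerate_iff]
    exact ⟨i, hi, by simp [hxdef]⟩
  have hmemt : ((j : Int), t) ∈ PySem.List.enumerate tags 0 := by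
    rw [PySem.List.mem_enumerate_iff]
    exact ⟨j, hj, by simp [htdef]⟩
  -- the model for A
  obtain ⟨hknd, hpos, hwfe⟩ := Efold_wf am tags
  have h0 : Wf am PySem.Dict.empty 0 := by
    refine ⟨?_, ?_, ?_⟩ <;> simp [PySem.Dict.empty, PySem.Dict.keys]
  have htne : tags ≠ [] := by
    intro h
    rw [h] at hj
    simp at hj
  have hAout : organize_subtags tags am
      = (PySem.List.sorted (Efold am tags).items (fun p => p.2.1) false).map
          (fun p => p.2.2) := by
    rw [organize_subtags]
    rw [if_neg (dfold_ne_nil am tags htne)]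
    have hdE : (tags.foldl (aStep am) PySem.Dict.empty).items = render (Efold am tags) :=
      (loop_main am tags PySem.Dict.empty PySem.Dict.empty 0 rfl h0).1
    show (tags.foldl (aStep am) PySem.Dict.empty).items.map Prod.snd = _
    rw [hdE, render, List.map_map]
    rfl
  -- B's two lists
  set kept := ((PySem.List.enumerate tags 0).foldl (keepStep am) (PySem.Set.empty, [])).2
    with hkept_def
  set keyedRaw := (((PySem.List.enumerate tags 0).reverse).foldl (keyedStep am)
    (PySem.Set.empty, [])).2 with hkraw_def
  set keyed := keyedRaw.reverse with hkeyed_def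
  have hBout : organize_subtags_alt tags am = (mergeP kept keyed).map Prod.snd := by
    rw [organize_subtags_alt]
    rw [← hkept_def, ← hkraw_def, ← hkeyed_def]
    exact mergeTags_eq_mergeP kept keyed
  have hLpw := PySem.List.pairwise_lt_enumerate tags 0
  have hcempty : ∀ y : String, PySem.Set.contains PySem.Set.empty y = false := fun y => rfl
  -- the first occurrence of the string x lands in kept
  have hxoccs : ((PySem.List.enumerate tags 0).filter (fun q => q.2 == x)) ≠ [] := by
    intro h
    have : ((i : Int), x) ∈ (PySem.List.enumerate tags 0).filter (fun q => q.2 == x) :=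
      List.mem_filter.mpr ⟨hmemx, by simp⟩
    rw [h] at this
    exact absurd this List.not_mem_nil
  obtain ⟨pm, hpmF, hpmin⟩ := min_fst_exists _ hxoccs
  have hpmL : pm ∈ PySem.List.enumerate tags 0 := (List.mem_filter.mp hpmF).1
  have hpmx : pm.2 = x := by
    have := (List.mem_filter.mp hpmF).2
    simpa using this
  have hpmkept : pm ∈ kept := by
    rw [hkept_def, kept_mem am _ hLpw PySem.Set.empty [] pm]
    refine Or.inr ⟨hpmL, by rw [hpmx]; exact hkx, hcempty _, ?_⟩
    intro q hq hqx
    exact hpmin q (List.mem_filter.mpr ⟨hq, by simp [hqx, hpmx]⟩)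
  have hpmi : pm.1 ≤ (i : Int) :=
    hpmin ((i : Int), x) (List.mem_filter.mpr ⟨hmemx, by simp⟩)
  -- the last k-keyed replace occurrence lands in keyed
  have hkoccs : ((PySem.List.enumerate tags 0).filter
      (fun q => !(keepCls am q.2) && (normKey q.2 == k))) ≠ [] := by
    intro h
    have : ((j : Int), t) ∈ (PySem.List.enumerate tags 0).filter
        (fun q => !(keepCls am q.2) && (normKey q.2 == k)) :=
      List.mem_filter.mpr ⟨hmemt, by simp [hkt, hkdef]⟩
    rw [h] at this
    exact absurd this List.not_mem_nil
  obtain ⟨w, hwF, hwmax⟩ := max_fst_exists _ hkoccs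
  have hwL : w ∈ PySem.List.enumerate tags 0 := (List.mem_filter.mp hwF).1
  have hwcond := (List.mem_filter.mp hwF).2
  have hwcond2 : (!(keepCls am w.2)) = true ∧ (normKey w.2 == k) = true := by
    rw [← Bool.and_eq_true]
    exact hwcond
  have hwrep : keepCls am w.2 = false := by
    have := hwcond2.1
    revert this
    cases keepCls am w.2 <;> simp
  have hwk : normKey w.2 = k := beq_iff_eq.mp hwcond2.2
  have hwlast : LastP am tags w := by
    refine ⟨hwL, hwrep, ?_⟩
    intro q hq hqr hqn
    exact hwmax q (List.mem_filter.mpr ⟨hq, by simp [hqr, hqn, hwk]⟩)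
  have hwkeyed : w ∈ keyed := by
    have hrevpw : ((PySem.List.enumerate tags 0).reverse).Pairwise (fun a b => b.1 < a.1) :=
      (List.pairwise_reverse).mpr hLpw
    rw [hkeyed_def, List.mem_reverse, hkraw_def,
      keyed_mem am _ hrevpw PySem.Set.empty [] w]
    exact Or.inr ⟨List.mem_reverse.mpr hwlast.1, hwlast.2.1, hcempty _,
      fun q hq hqr hqn => hwlast.2.2 q (List.mem_reverse.mp hq) hqr hqn⟩
  have hjw : (j : Int) ≤ w.1 :=
    hwmax ((j : Int), t) (List.mem_filter.mpr ⟨hmemt, by simp [hkt, hkdef]⟩)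
  -- A's replace entry for key k is exactly ((0,k), w)
  have hwE : ((((0 : Int), k) : Int × String), w) ∈ (Efold am tags).items := by
    have hwimg : w ∈ ((Efold am tags).items.filter (fun p => !(isK p))).map Prod.snd :=
      (cls0_mem am tags w).mpr hwlast
    obtain ⟨pe, hpe, hpee⟩ := List.mem_map.mp hwimg
    have hpem := (List.mem_filter.mp hpe).1
    have hpek := (List.mem_filter.mp hpe).2
    have hpekf : isK pe = false := by revert hpek; cases isK pe <;> simp
    obtain ⟨hpekey, -⟩ := cls0_entry_key (hwfe pe hpem) hpekf
    have : pe = ((((0 : Int), k) : Int × String), w) := by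
      refine Prod.ext ?_ hpee
      rw [hpekey, hpee, hwk]
    rw [← this]
    exact hpem
  -- B orders x before w
  have hpm_lt_w : pm.1 < w.1 := by
    have h1 : (i : Int) < (j : Int) := by exact_mod_cast hij
    omega
  -- pairwise structure of B's merge
  obtain ⟨ksub, hksub_eq, hksub⟩ :=
    keepStep_sublist am (PySem.List.enumerate tags 0) (PySem.Set.empty, [])
  have hkept_sub : kept.Sublist (PySem.List.enumerate tags 0) := by
    rw [hkept_def, hksub_eq]
    simpa using hksub
  obtain ⟨rsub, hrsub_eq, hrsub⟩ :=
    keyedStep_sublist am ((PySem.List.enumerate tags 0).reverse) (PySem.Set.empty, [])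
  have hraw_sub : keyedRaw.Sublist ((PySem.List.enumerate tags 0).reverse) := by
    rw [hkraw_def, hrsub_eq]
    simpa using hrsub
  have hkeyed_sub : keyed.Sublist (PySem.List.enumerate tags 0) := by
    rw [hkeyed_def]
    have := hraw_sub.reverse
    simpa using this
  have hkept_pw : kept.Pairwise (fun a b => a.1 < b.1) := hLpw.sublist hkept_sub
  have hkeyed_pw : keyed.Pairwise (fun a b => a.1 < b.1) := hLpw.sublist hkeyed_sub
  have hdisj : ∀ a ∈ kept, ∀ b ∈ keyed, a.1 ≠ b.1 := by
    intro a ha b hb hab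
    have haL : a ∈ PySem.List.enumerate tags 0 := hkept_sub.mem ha
    have hbL : b ∈ PySem.List.enumerate tags 0 := hkeyed_sub.mem hb
    have hav : a = b := nodup_key_unique _ (enumerate_fst_nodup tags) haL hbL hab
    subst hav
    have h1 : keepCls am a.2 = true := by
      rw [hkept_def, kept_mem am _ hLpw PySem.Set.empty [] a] at ha
      rcases ha with h | ⟨-, h, -, -⟩
      · exact absurd h List.not_mem_nil
      · exact h
    have h2 : keepCls am a.2 = false := by
      have hrevpw : ((PySem.List.enumerate tags 0).reverse).Pairwise (fun c d => d.1 < c.1) :=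
        (List.pairwise_reverse).mpr hLpw
      rw [hkeyed_def, List.mem_reverse, hkraw_def,
        keyed_mem am _ hrevpw PySem.Set.empty [] a] at hb
      rcases hb with h | ⟨-, h, -, -⟩
      · exact absurd h List.not_mem_nil
      · exact h
    rw [h1] at h2
    exact absurd h2 (by simp)
  have hBpw : (mergeP kept keyed).Pairwise (fun a b => a.1 < b.1) :=
    mergeP_pairwise kept keyed hkept_pw hkeyed_pw hdisj
  have hpmB : pm ∈ mergeP kept keyed :=
    (mergeP_perm kept keyed).mem_iff.mpr (List.mem_append.mpr (Or.inl hpmkept))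
  have hwB : w ∈ mergeP kept keyed :=
    (mergeP_perm kept keyed).mem_iff.mpr (List.mem_append.mpr (Or.inr hwkeyed))
  -- case split on whether x survived in A's dict
  by_cases hxe : ∃ px : Int × String, (((1 : Int), x), px) ∈ (Efold am tags).items
  · -- x survived: A lists w.2 before x, B lists x before w.2
    obtain ⟨px, hpx⟩ := hxe
    have hpxval : px.2 = x :=
      ((WfE_keep am _ (hwfe _ hpx) (by rfl)).1).symm
    have hKI : KillInv k (Efold am tags) := by
      rw [Efold]
      apply kill_loop am k tags PySem.Dict.empty 0 h0
      intro a b ha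
      exact absurd ha (by simp [PySem.Dict.empty])
    have hlt1 : w.1 < px.1 := by
      apply hKI px w _ hwE
      rw [← hvict]
      exact hpx
    -- the sorted pair list of A
    set wA := (PySem.List.sorted (Efold am tags).items (fun p => p.2.1) false).map
      (fun p => (p.2.1, p.2.2)) with hwA_def
    have hwApw : wA.Pairwise (fun a b => a.1 < b.1) :=
      List.pairwise_map.mpr (sorted_strict _ _ hpos)
    have hwAeq : organize_subtags tags am = wA.map Prod.snd := by
      rw [hAout, hwA_def, List.map_map]
      rfl
    have hwAnd : (wA.map Prod.snd).Nodup := by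
      have : wA.map Prod.snd
          = (PySem.List.sorted (Efold am tags).items (fun p => p.2.1) false).map
              (fun p => p.2.2) := by
        rw [hwA_def, List.map_map]
        rfl
      rw [this]
      exact A_values_nodup am tags
    have hxwA : (px.1, x) ∈ wA := by
      rw [hwA_def]
      refine List.mem_map.mpr ⟨(((1 : Int), x), px),
        (PySem.List.mem_sorted _ _ _ _).mpr hpx, ?_⟩
      rw [hpxval]
    have hwwA : (w.1, w.2) ∈ wA := by
      rw [hwA_def]
      exact List.mem_map.mpr ⟨((((0 : Int), k) : Int × String), w),
        (PySem.List.mem_sorted _ _ _ _).mpr hwE, rfl⟩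
    intro hEq
    have hEqLists : wA.map Prod.snd = (mergeP kept keyed).map Prod.snd := by
      rw [← hwAeq, ← hBout]
      exact hEq
    have hBnd : ((mergeP kept keyed).map Prod.snd).Nodup := by
      rw [← hEqLists]
      exact hwAnd
    have hidxA := before_of_lt wA hwApw hwAnd (px.1, x) (w.1, w.2) hxwA hwwA hlt1
    have hidxB := before_of_lt (mergeP kept keyed) hBpw hBnd w pm hwB hpmB hpm_lt_w
    rw [hEqLists] at hidxA
    rw [hpmx] at hidxB
    simp only at hidxA hidxB
    omega
  · -- x was killed for good: B's output contains the string x, A's does not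
    intro hEq
    apply hxe
    have hxB : x ∈ organize_subtags_alt tags am := by
      rw [hBout]
      rw [← hpmx]
      exact List.mem_map_of_mem hpmB
    rw [← hEq] at hxB
    rw [hAout] at hxB
    obtain ⟨p, hp, hpe⟩ := List.mem_map.mp hxB
    have hp' : p ∈ (Efold am tags).items := (PySem.List.mem_sorted _ _ _ _).mp hp
    by_cases hk1 : isK p = true
    · obtain ⟨hpk, -⟩ := isK_entry_key (hwfe p hp') hk1
      refine ⟨p.2, ?_⟩
      have : p = (((1 : Int), x), p.2) := by
        refine Prod.ext ?_ rfl
        rw [hpk, hpe]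
      rw [← this]
      exact hp'
    · have hk1f : isK p = false := by revert hk1; cases isK p <;> simp
      obtain ⟨-, hpc⟩ := cls0_entry_key (hwfe p hp') hk1f
      rw [hpe, hkx] at hpc
      exact absurd hpc (by simp)

-- ===== VERDICT (by name: the statements are the Claim_ definitions above) =====
theorem organize_subtags_spec : Claim_unchanged_organize_subtags := by
  intro tags am _hdom hnd
  exact main_equiv tags am hnd

theorem organize_subtags_changed : Claim_changed_organize_subtags := by
  unfold Claim_changed_organize_subtags
  refine ⟨by decide, by decide, by decide, ?_, by decide⟩
  show organize_subtags_alt ["a=b=", "a=b:c"] ["a"] = ["a=b=", "a=b:c"]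
  simp only [organize_subtags_alt]
  have h1 : ((PySem.List.enumerate ["a=b=", "a=b:c"] 0).foldl (keepStep ["a"])
      (PySem.Set.empty, [])).2 = [((0 : Int), "a=b=")] := by decide
  have h2 : (((PySem.List.enumerate ["a=b=", "a=b:c"] 0).reverse).foldl (keyedStep ["a"])
      (PySem.Set.empty, [])).2.reverse = [((1 : Int), "a=b:c")] := by decide
  rw [h1, h2]
  simp [mergeTags]

theorem organize_subtags_tight : Claim_exact_organize_subtags := by
  intro tags am _hdom hD
  exact tight_main tags am hD
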